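-- pv_equiv track=rewrite | github.com/SamsungLabs/eagle | eagle/models/nasbench201/utils.py | get_matrix_and_ops
-- ===== SOURCE A (Python) =====
-- import copy
--
-- def get_matrix_and_ops(g, prune=True, keep_dims=False):
--     ''' Return the adjacency matrix and label vector.
--
--         Args:
--             g : should be a point from Nasbench102 search space
--             prune : remove dangling nodes that only connected to zero ops
--             keep_dims : keep the original matrix size after pruning
--     '''
--
--     matrix = [[0 for _ in range(8)] for _ in range(8)]
--     labels = [None for _ in range(8)]
--     labels[0] = 'input'
--     labels[-1] = 'output'
--     matrix[0][1] = matrix[0][2] = matrix[0][4] = 1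
--     matrix[1][3] = matrix[1][5] = 1
--     matrix[2][6] = 1
--     matrix[3][6] = 1
--     matrix[4][7] = 1
--     matrix[5][7] = 1
--     matrix[6][7] = 1
--
--     for idx, op in enumerate(g):
--         if op == 0: # zero
--             for other in range(8):
--                 if matrix[other][idx+1]:
--                     matrix[other][idx+1] = 0
--                 if matrix[idx+1][other]:
--                     matrix[idx+1][other] = 0
--         elif op == 1: # skip-connection:
--             to_del = []
--             for other in range(8):
--                 if matrix[other][idx+1]:
--                     for other2 in range(8):
--                         if matrix[idx+1][other2]:
--                             matrix[other][other2] = 1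
--                             matrix[other][idx+1] = 0
--                             to_del.append(other2)
--             for d in to_del:
--                 matrix[idx+1][d] = 0
--         else:
--             labels[idx+1] = str(op)
--
--     if prune:
--         visited_fw = [False for _ in range(8)]
--         visited_bw = copy.copy(visited_fw)
--
--         def bfs(beg, vis, con_f):
--             q = [beg]
--             vis[beg] = True
--             while q:
--                 v = q.pop()
--                 for other in range(8):
--                     if not vis[other] and con_f(v, other):
--                         q.append(other)
--                         vis[other] = True
--
--         bfs(0, visited_fw, lambda src, dst: matrix[src][dst]) # forward
--         bfs(7, visited_bw, lambda src, dst: matrix[dst][src]) # backward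
--
--         for v in range(7, -1, -1):
--             if not visited_fw[v] or not visited_bw[v]:
--                 labels[v] = None
--                 if keep_dims:
--                     matrix[v] = [0] * 8
--                 else:
--                     del matrix[v]
--                 for other in range(len(matrix)):
--                     if keep_dims:
--                         matrix[other][v] = 0
--                     else:
--                         del matrix[other][v]
--
--         if not keep_dims:
--             labels = list(filter(lambda l: l is not None, labels))
--
--         assert visited_fw[-1] == visited_bw[0]
--         assert visited_fw[-1] == False or matrix
--
--         verts = len(matrix)
--         assert verts == len(labels)
--         for row in matrix:
--             assert len(row) == verts
--
--     return matrix, labels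
-- ===== SOURCE B (Python) =====
-- def get_matrix_and_ops(g, prune=True, keep_dims=False):
--     ''' Return the adjacency matrix and label vector (edge-set formulation). '''
--     E = {(0, 1), (0, 2), (0, 4), (1, 3), (1, 5), (2, 6), (3, 6), (4, 7), (5, 7), (6, 7)}
--     for idx, op in enumerate(g):
--         v = idx + 1
--         if op == 0:  # zero op: drop every edge touching the node
--             E = {e for e in E if v not in e}
--         elif op == 1:  # skip-connection: splice predecessors onto successors
--             preds = {a for (a, b) in E if b == v}
--             succs = {b for (a, b) in E if a == v}
--             if preds and succs:
--                 E = {e for e in E if v not in e} | {(p, s) for p in preds for s in succs}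
--
--     def lab(v):
--         if 1 <= v <= len(g) and g[v - 1] != 0 and g[v - 1] != 1:
--             return str(g[v - 1])
--         if v == 0:
--             return 'input'
--         if v == 7:
--             return 'output'
--         return None
--
--     if not prune:
--         return [[int((r, c) in E) for c in range(8)] for r in range(8)], [lab(v) for v in range(8)]
--
--     def reach(start, nbrs):
--         seen, frontier = {start}, {start}
--         while frontier:
--             frontier = {w for v in frontier for w in nbrs(v)} - seen
--             seen |= frontier
--         return seen
--
--     fw = reach(0, lambda v: [b for (a, b) in E if a == v])
--     bw = reach(7, lambda v: [a for (a, b) in E if b == v])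
--     kept = [v for v in range(8) if v in fw and v in bw]
--
--     if keep_dims:
--         return ([[int(r in kept and c in kept and (r, c) in E) for c in range(8)] for r in range(8)],
--                 [lab(v) if v in kept else None for v in range(8)])
--     return ([[int((r, c) in E) for c in kept] for r in kept],
--             [lab(v) for v in kept if lab(v) is not None])
-- ===== Notes on version B (the rewrite author's own statement) =====
-- stated objective: alternative
-- what changed: B replaces A's in-place 8x8 matrix surgery by a functional edge-set representation (set comprehensions for the zero/skip rewiring), computes labels by a closed-form function of g instead of loop assignments, uses frontier-set reachability instead of A's explicit stack BFS, and builds the pruned matrix/labels by comprehension over the kept-node list instead of A's reverse in-place row/column deletion.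
import Mathlib
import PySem

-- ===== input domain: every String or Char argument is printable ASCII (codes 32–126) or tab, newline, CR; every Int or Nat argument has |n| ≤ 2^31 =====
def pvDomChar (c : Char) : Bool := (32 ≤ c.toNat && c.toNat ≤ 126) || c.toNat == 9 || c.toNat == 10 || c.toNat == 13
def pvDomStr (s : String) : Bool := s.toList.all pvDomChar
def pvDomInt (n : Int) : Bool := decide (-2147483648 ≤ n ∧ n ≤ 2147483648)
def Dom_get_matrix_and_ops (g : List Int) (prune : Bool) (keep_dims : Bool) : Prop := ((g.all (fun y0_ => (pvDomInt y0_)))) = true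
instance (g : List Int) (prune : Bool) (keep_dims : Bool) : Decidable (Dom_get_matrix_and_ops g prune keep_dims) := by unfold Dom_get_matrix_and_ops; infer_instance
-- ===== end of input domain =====

-- B trades A's in-place 8x8 matrix surgery for a functional edge-set representation (comprehension
-- rebuilds for the zero/skip rewiring), closed-form labels computed from g, frontier-set reachability
-- instead of A's explicit stack loop, and comprehension pruning over the kept-node list instead of
-- A's reverse in-place row/column deletion (objective: alternative).

-- ===== PORT A =====
-- All Python list indices below are nonnegative and in range on every input Pre_ admits, so plain
-- `getD`/`set` (no-ops out of range, like the excluded raising inputs) transliterate them exactly.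
def pvGet2 (m : List (List Int)) (i j : Nat) : Int := (m.getD i []).getD j 0
def pvSet2 (m : List (List Int)) (i j : Nat) (x : Int) : List (List Int) := m.set i ((m.getD i []).set j x)

def pvInitMatrixA : List (List Int) :=
  pvSet2 (pvSet2 (pvSet2 (pvSet2 (pvSet2 (pvSet2 (pvSet2 (pvSet2 (pvSet2 (pvSet2
    (List.replicate 8 (List.replicate 8 0))
    0 1 1) 0 2 1) 0 4 1) 1 3 1) 1 5 1) 2 6 1) 3 6 1) 4 7 1) 5 7 1) 6 7 1

-- labels[0] = 'input', labels[-1] = labels[7] = 'output'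
def pvInitLabelsA : List (Option String) :=
  ((List.replicate 8 (none : Option String)).set 0 (some "input")).set 7 (some "output")

def pvOpStepA (st : List (List Int) × List (Option String)) (x : Int × Nat) :
    List (List Int) × List (Option String) :=
  let m := st.1
  let labels := st.2
  let op := x.1
  let v := x.2 + 1
  if op = 0 then
    ((List.range 8).foldl (fun m other =>
        let m1 := if pvGet2 m other v ≠ 0 then pvSet2 m other v 0 else m
        if pvGet2 m1 v other ≠ 0 then pvSet2 m1 v other 0 else m1) m,
     labels)
  else if op = 1 then
    let r := (List.range 8).foldl (fun (st2 : List (List Int) × List Nat) other =>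
        if pvGet2 st2.1 other v ≠ 0 then
          (List.range 8).foldl (fun (st3 : List (List Int) × List Nat) other2 =>
              if pvGet2 st3.1 v other2 ≠ 0 then
                (pvSet2 (pvSet2 st3.1 other other2 1) other v 0, st3.2 ++ [other2])
              else st3) st2
        else st2) (m, ([] : List Nat))
    (r.2.foldl (fun m d => pvSet2 m v d 0) r.1, labels)
  else (m, labels.set v (some (PySem.Int.toStr op)))

-- `while q: v = q.pop(); …` — the stack loop; the measure 9·(#unvisited) + |q| strictly decreases
-- each iteration, so fuel 73 is never exhausted on the 8-node calls below (proved in the lemmas).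
def pvBfsA (conf : Nat → Nat → Int) : Nat → List Nat → List Bool → List Bool
  | 0, _, vis => vis
  | fuel + 1, q, vis =>
    match q.getLast? with
    | none => vis
    | some v =>
      let st := (List.range 8).foldl (fun (st : List Nat × List Bool) other =>
          if st.2.getD other true = false ∧ conf v other ≠ 0 then
            (st.1 ++ [other], st.2.set other true)
          else st) (q.dropLast, vis)
      pvBfsA conf fuel st.1 st.2

def pvPruneStepA (vf vb : List Bool) (keep_dims : Bool)
    (st : List (List Int) × List (Option String)) (v : Nat) :
    List (List Int) × List (Option String) :=
  let m := st.1
  let labels := st.2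
  if vf.getD v false = false ∨ vb.getD v false = false then
    let labels := labels.set v none
    if keep_dims then
      let m1 := m.set v (List.replicate 8 0)
      ((List.range m1.length).foldl (fun m other => pvSet2 m other v 0) m1, labels)
    else
      let m1 := m.eraseIdx v
      ((List.range m1.length).foldl (fun m other => m.set other ((m.getD other []).eraseIdx v)) m1, labels)
  else (m, labels)

-- The Python asserts are omitted: they hold on every input Pre_ admits (where they raise, Pre_ excludes).
def get_matrix_and_ops (g : List Int) (prune : Bool) (keep_dims : Bool) :
    List (List Int) × List (Option String) :=
  let st := (List.zipIdx g).foldl pvOpStepA (pvInitMatrixA, pvInitLabelsA)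
  let m := st.1
  let labels := st.2
  if prune then
    let vf := pvBfsA (fun src dst => pvGet2 m src dst) 73 [0] ((List.replicate 8 false).set 0 true)
    let vb := pvBfsA (fun src dst => pvGet2 m dst src) 73 [7] ((List.replicate 8 false).set 7 true)
    let st2 := ((List.range 8).reverse).foldl (pvPruneStepA vf vb keep_dims) (m, labels)
    (st2.1, if keep_dims then st2.2 else st2.2.filter (fun l => l.isSome))
  else (m, labels)

-- ===== PORT B =====
-- B keeps the cell as a SET of edges (Python set of pairs; it is only ever queried by membership).
def pvEdges0 : List (Nat × Nat) :=
  [(0,1),(0,2),(0,4),(1,3),(1,5),(2,6),(3,6),(4,7),(5,7),(6,7)]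

def pvEStep (E : List (Nat × Nat)) (x : Int × Nat) : List (Nat × Nat) :=
  let v := x.2 + 1
  if x.1 = 0 then
    E.filter (fun e => ¬(e.1 = v ∨ e.2 = v))
  else if x.1 = 1 then
    let preds := PySem.Set.ofList ((E.filter (fun e => e.2 = v)).map Prod.fst)
    let succs := PySem.Set.ofList ((E.filter (fun e => e.1 = v)).map Prod.snd)
    if preds ≠ [] ∧ succs ≠ [] then
      PySem.Set.ofList (E.filter (fun e => ¬(e.1 = v ∨ e.2 = v)) ++
        preds.flatMap (fun p => succs.map (fun s => (p, s))))
    else E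
  else E

-- closed-form label of node v: the op name where g labels it, else input/output endpoint, else None
-- (g[v-1] is read with getD: the guard 1 <= v <= len(g) keeps the index in range, as in Source B)
def pvLab (g : List Int) (v : Nat) : Option String :=
  if 1 ≤ v ∧ v ≤ g.length ∧ g.getD (v-1) 0 ≠ 0 ∧ g.getD (v-1) 0 ≠ 1 then
    some (PySem.Int.toStr (g.getD (v-1) 0))
  else if v = 0 then some "input"
  else if v = 7 then some "output"
  else none

-- `while frontier: frontier = {next} - seen; seen |= frontier`; seen grows while the frontier is
-- nonempty and holds at most the 8 cell nodes, so fuel 9 is never exhausted (proved in the lemmas).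
def pvGrow (nbrs : Nat → List Nat) : Nat → PySem.Set Nat → PySem.Set Nat → PySem.Set Nat
  | 0, seen, _ => seen
  | fuel + 1, seen, frontier =>
    if frontier = [] then seen
    else
      let f' := PySem.Set.diff (PySem.Set.ofList (frontier.flatMap nbrs)) seen
      pvGrow nbrs fuel (PySem.Set.union seen f') f'

def get_matrix_and_ops_alt (g : List Int) (prune : Bool) (keep_dims : Bool) :
    List (List Int) × List (Option String) :=
  let E := (List.zipIdx g).foldl pvEStep pvEdges0
  if ¬ prune then
    ((List.range 8).map (fun r => (List.range 8).map (fun c => if (r, c) ∈ E then (1 : Int) else 0)),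
     (List.range 8).map (fun v => pvLab g v))
  else
    let fw := pvGrow (fun v => (E.filter (fun e => e.1 = v)).map Prod.snd) 9 [0] [0]
    let bw := pvGrow (fun v => (E.filter (fun e => e.2 = v)).map Prod.fst) 9 [7] [7]
    let kept := (List.range 8).filter (fun v => v ∈ fw ∧ v ∈ bw)
    if keep_dims then
      ((List.range 8).map (fun r => (List.range 8).map (fun c =>
          if r ∈ kept ∧ c ∈ kept ∧ (r, c) ∈ E then (1 : Int) else 0)),
       (List.range 8).map (fun v => if v ∈ kept then pvLab g v else none))
    else
      (kept.map (fun r => kept.map (fun c => if (r, c) ∈ E then (1 : Int) else 0)),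
       (kept.filter (fun v => (pvLab g v).isSome)).map (fun v => pvLab g v))

-- ===== PRECONDITION & SPEC =====
-- Pre_ excludes g longer than 7 (IndexError in A) and, under prune without keep_dims, g shorter
-- than 6 ops: there unprocessed cell nodes generally survive unlabeled and A's
-- `verts == len(labels)` assert raises AssertionError (on the minority of such inputs where the
-- cell is disconnected enough that A still returns, B returns the same value).
def Pre_get_matrix_and_ops (g : List Int) (prune : Bool) (keep_dims : Bool) : Prop :=
  g.length ≤ 7 ∧ (prune = true → keep_dims = true ∨ 6 ≤ g.length)
instance (g : List Int) (prune : Bool) (keep_dims : Bool) :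
    Decidable (Pre_get_matrix_and_ops g prune keep_dims) := by
  unfold Pre_get_matrix_and_ops; infer_instance

def pvWitness_get_matrix_and_ops : List Int × Bool × Bool := ([2, 3, 1, 0, 2, 4], true, false)

def Spec_get_matrix_and_ops (g : List Int) (prune : Bool) (keep_dims : Bool)
    (out : List (List Int) × List (Option String)) : Prop :=
  out = get_matrix_and_ops_alt g prune keep_dims
instance (g : List Int) (prune : Bool) (keep_dims : Bool)
    (out : List (List Int) × List (Option String)) :
    Decidable (Spec_get_matrix_and_ops g prune keep_dims out) := by
  unfold Spec_get_matrix_and_ops; infer_instance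

-- ===== CLAIM (what is proved, stated in full; the proofs are below) =====
def Claim_equal_get_matrix_and_ops : Prop := ∀ (g : List Int) (prune : Bool) (keep_dims : Bool), Dom_get_matrix_and_ops g prune keep_dims → Pre_get_matrix_and_ops g prune keep_dims → Spec_get_matrix_and_ops g prune keep_dims (get_matrix_and_ops g prune keep_dims)

-- ===== LEMMAS AND PROOFS =====

-- ===== basic facts about A's cell-matrix accessors =====
-- shape: an 8×8 matrix; strict upper-triangularity and 0/1-valuedness on the 8×8 square
def pvSq8 (m : List (List Int)) : Prop := m.length = 8 ∧ ∀ r ∈ m, r.length = 8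
def pvUT (m : List (List Int)) : Prop := ∀ i j : Nat, i < 8 → j < 8 → j ≤ i → pvGet2 m i j = 0
def pv01 (m : List (List Int)) : Prop := ∀ a b : Nat, a < 8 → b < 8 → pvGet2 m a b = 0 ∨ pvGet2 m a b = 1

theorem pvSet2_of_length_le (m : List (List Int)) (i j : Nat) (x : Int) (h : m.length ≤ i) :
    pvSet2 m i j x = m := List.set_eq_of_length_le h

theorem pvSet2_length (m : List (List Int)) (i j : Nat) (x : Int) :
    (pvSet2 m i j x).length = m.length := by simp [pvSet2]

theorem pvSet2_row_ne (m : List (List Int)) (i j : Nat) (x : Int) (a : Nat) (h : i ≠ a) :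
    (pvSet2 m i j x).getD a [] = m.getD a [] := by
  simp [pvSet2, List.getD, List.getElem?_set, h]

theorem pvSet2_row_self (m : List (List Int)) (i j : Nat) (x : Int) (hi : i < m.length) :
    (pvSet2 m i j x).getD i [] = (m.getD i []).set j x := by
  simp [pvSet2, List.getD, List.getElem?_set, hi]

theorem pvGet2_pvSet2_ne (m : List (List Int)) (i j a b : Nat) (x : Int)
    (h : i ≠ a ∨ j ≠ b) : pvGet2 (pvSet2 m i j x) a b = pvGet2 m a b := by
  by_cases hia : i = a
  · subst hia
    rcases h with h | h
    · exact absurd rfl h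
    · by_cases hi : i < m.length
      · rw [pvGet2, pvSet2_row_self m i j x hi, List.getD, List.getElem?_set]
        simp [h, pvGet2, List.getD]
      · rw [pvSet2_of_length_le m i j x (le_of_not_gt hi)]
  · rw [pvGet2, pvSet2_row_ne m i j x a hia, pvGet2]

theorem pvGet2_pvSet2_self (m : List (List Int)) (i j : Nat) (x : Int)
    (hi : i < m.length) (hj : j < (m.getD i []).length) :
    pvGet2 (pvSet2 m i j x) i j = x := by
  have hj' : j < (m[i]?.getD []).length := by simpa [List.getD] using hj
  rw [pvGet2, pvSet2_row_self m i j x hi, List.getD, List.getElem?_set]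
  simp [hj']

theorem pvSet2_self (m : List (List Int)) (i j : Nat) (x : Int) (h : pvGet2 m i j = x) :
    pvSet2 m i j x = m := by
  by_cases hi : i < m.length
  · by_cases hj : j < (m.getD i []).length
    · have hrow : (m.getD i []).set j x = m.getD i [] := by
        have hx : (m.getD i []).getD j 0 = x := h
        rw [List.getD_eq_getElem _ _ hj] at hx
        rw [← hx]
        exact List.set_getElem_self hj
      rw [pvSet2, hrow, List.getD_eq_getElem _ _ hi]
      exact List.set_getElem_self hi
    · rw [pvSet2, List.set_eq_of_length_le (le_of_not_gt hj), List.getD_eq_getElem _ _ hi]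
      exact List.set_getElem_self hi
  · exact pvSet2_of_length_le m i j x (le_of_not_gt hi)

theorem pvSet2_pvSet2_row (m : List (List Int)) (i j j' : Nat) (x y : Int) (hi : i < m.length) :
    pvSet2 (pvSet2 m i j x) i j' y = m.set i (((m.getD i []).set j x).set j' y) := by
  show (pvSet2 m i j x).set i (((pvSet2 m i j x).getD i []).set j' y) = _
  rw [pvSet2_row_self m i j x hi, pvSet2, List.set_set]

theorem pvSet2_comm_col (m : List (List Int)) (i j j' : Nat) (x y : Int) (h : j ≠ j') :
    pvSet2 (pvSet2 m i j x) i j' y = pvSet2 (pvSet2 m i j' y) i j x := by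
  by_cases hi : i < m.length
  · rw [pvSet2_pvSet2_row m i j j' x y hi, pvSet2_pvSet2_row m i j' j y x hi,
        List.set_comm _ _ h]
  · have hle := le_of_not_gt hi
    rw [pvSet2_of_length_le m i j x hle, pvSet2_of_length_le m i j' y hle,
        pvSet2_of_length_le m i j x hle]

theorem pvSq8_pvSet2 (m : List (List Int)) (h : pvSq8 m) (i j : Nat) (x : Int) :
    pvSq8 (pvSet2 m i j x) := by
  obtain ⟨h1, h2⟩ := h
  by_cases hi : i < m.length
  · refine ⟨by rw [pvSet2_length, h1], ?_⟩
    intro r hr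
    rcases List.mem_or_eq_of_mem_set hr with hr | hr
    · exact h2 r hr
    · rw [hr, List.length_set]
      exact h2 _ (by rw [List.getD_eq_getElem _ _ hi]; exact List.getElem_mem hi)
  · rw [pvSet2_of_length_le m i j x (le_of_not_gt hi)]; exact ⟨h1, h2⟩

theorem pvSq8_row (m : List (List Int)) (h : pvSq8 m) (i : Nat) (hi : i < 8) :
    (m.getD i []).length = 8 := by
  have hil : i < m.length := by rw [h.1]; exact hi
  rw [List.getD_eq_getElem _ _ hil]
  exact h.2 _ (List.getElem_mem hil)

theorem pvGet2_col_default (m : List (List Int)) (i j : Nat) (h : m.length ≤ i) :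
    pvGet2 m i j = 0 := by rw [pvGet2, List.getD_eq_default _ _ h]; rfl

theorem pvGet2_oob (m : List (List Int)) (h : pvSq8 m) (a b : Nat) (hab : 8 ≤ a ∨ 8 ≤ b) :
    pvGet2 m a b = 0 := by
  rcases hab with ha | hb
  · exact pvGet2_col_default m a b (by rw [h.1]; exact ha)
  · by_cases ha : a < 8
    · rw [pvGet2, List.getD_eq_default _ _ (by rw [pvSq8_row m h a ha]; exact hb)]
    · exact pvGet2_col_default m a b (by rw [h.1]; omega)

theorem pvGet2_pvSet2_zero_self (m : List (List Int)) (i j : Nat) :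
    pvGet2 (pvSet2 m i j 0) i j = 0 := by
  by_cases hi : i < m.length
  · by_cases hj : j < (m.getD i []).length
    · exact pvGet2_pvSet2_self m i j 0 hi hj
    · have hrow : (m.getD i []).set j 0 = m.getD i [] :=
        List.set_eq_of_length_le (le_of_not_gt hj)
      have hm : m.set i (m.getD i []) = m := by
        rw [List.getD_eq_getElem _ _ hi]; exact List.set_getElem_self hi
      rw [pvSet2, hrow, hm, pvGet2]
      exact List.getD_eq_default _ _ (le_of_not_gt hj)
  · rw [pvSet2_of_length_le m i j 0 (le_of_not_gt hi)]
    exact pvGet2_col_default m i j (le_of_not_gt hi)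

-- ===== the op == 0 branch: conditional zeroing = zeroing the node's row and column =====
theorem pv_op0_body_eq (v : Nat) (m : List (List Int)) (other : Nat) :
    (let m1 := if pvGet2 m other v ≠ 0 then pvSet2 m other v 0 else m
     if pvGet2 m1 v other ≠ 0 then pvSet2 m1 v other 0 else m1) =
    pvSet2 (pvSet2 m other v 0) v other 0 := by
  have h1 : (if pvGet2 m other v ≠ 0 then pvSet2 m other v 0 else m) = pvSet2 m other v 0 := by
    split
    · rfl
    · next h => exact (pvSet2_self m other v 0 (not_not.mp h)).symm
  rw [h1]
  show (if pvGet2 (pvSet2 m other v 0) v other ≠ 0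
        then pvSet2 (pvSet2 m other v 0) v other 0 else pvSet2 m other v 0) = _
  split
  · rfl
  · next h => exact (pvSet2_self _ v other 0 (not_not.mp h)).symm

theorem pv_op0_eq (v : Nat) (m : List (List Int)) :
    (List.range 8).foldl (fun m other =>
        let m1 := if pvGet2 m other v ≠ 0 then pvSet2 m other v 0 else m
        if pvGet2 m1 v other ≠ 0 then pvSet2 m1 v other 0 else m1) m =
    (List.range 8).foldl (fun m other => pvSet2 (pvSet2 m other v 0) v other 0) m := by
  have hf : (fun (m : List (List Int)) (other : Nat) =>
      let m1 := if pvGet2 m other v ≠ 0 then pvSet2 m other v 0 else m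
      if pvGet2 m1 v other ≠ 0 then pvSet2 m1 v other 0 else m1) =
      (fun m other => pvSet2 (pvSet2 m other v 0) v other 0) :=
    funext fun m => funext fun other => pv_op0_body_eq v m other
  rw [hf]

-- elementwise value of the zeroing fold
theorem pv_zr_get (v : Nat) :
    ∀ (l : List Nat) (m : List (List Int)), pvSq8 m → v < 8 →
    ∀ a b : Nat, a < 8 → b < 8 →
      pvGet2 (l.foldl (fun m o => pvSet2 (pvSet2 m o v 0) v o 0) m) a b =
        if (b = v ∧ a ∈ l) ∨ (a = v ∧ b ∈ l) then 0 else pvGet2 m a b := by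
  intro l
  induction l with
  | nil => intro m _ _ a b _ _; simp
  | cons o l ih =>
    intro m hsq hv a b ha hb
    have hsq1 : pvSq8 (pvSet2 (pvSet2 m o v 0) v o 0) :=
      pvSq8_pvSet2 _ (pvSq8_pvSet2 _ hsq o v 0) v o 0
    rw [List.foldl_cons, ih _ hsq1 hv a b ha hb]
    have hstep : pvGet2 (pvSet2 (pvSet2 m o v 0) v o 0) a b =
        if (b = v ∧ a = o) ∨ (a = v ∧ b = o) then 0 else pvGet2 m a b := by
      by_cases h1 : a = v ∧ b = o
      · rw [if_pos (Or.inr h1)]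
        obtain ⟨rfl, rfl⟩ := h1
        exact pvGet2_pvSet2_zero_self _ _ _
      · have hne1 : pvGet2 (pvSet2 (pvSet2 m o v 0) v o 0) a b =
            pvGet2 (pvSet2 m o v 0) a b :=
          pvGet2_pvSet2_ne _ _ _ _ _ _ (by tauto)
        by_cases h2 : b = v ∧ a = o
        · rw [if_pos (Or.inl h2), hne1]
          obtain ⟨rfl, rfl⟩ := h2
          exact pvGet2_pvSet2_zero_self _ _ _
        · rw [if_neg (by tauto), hne1]
          exact pvGet2_pvSet2_ne _ _ _ _ _ _ (by tauto)
    rw [hstep]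
    by_cases hbv : b = v <;> by_cases hav : a = v <;>
      by_cases hao : a = o <;> by_cases hbo : b = o <;>
      by_cases hal : a ∈ l <;> by_cases hbl : b ∈ l <;>
      simp_all

theorem pvSq8_zr (v : Nat) (l : List Nat) (m : List (List Int)) (hsq : pvSq8 m) :
    pvSq8 (l.foldl (fun m o => pvSet2 (pvSet2 m o v 0) v o 0) m) :=
  List.foldlRecOn _ _ hsq (fun mm hm o _ => pvSq8_pvSet2 _ (pvSq8_pvSet2 _ hm o v 0) v o 0)

-- ===== the op == 1 branch: interleaved rewiring = pred/succ-list rewiring =====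
theorem pv_interfold_get_ne (v y : Nat) (S : List Nat) (a b : Nat) (hay : a ≠ y) :
    ∀ m, pvGet2 (S.foldl (fun m s => pvSet2 (pvSet2 m y s 1) y v 0) m) a b = pvGet2 m a b := by
  induction S with
  | nil => intro m; rfl
  | cons s S ih =>
    intro m
    rw [List.foldl_cons, ih, pvGet2_pvSet2_ne _ _ _ _ _ _ (Or.inl (Ne.symm hay)),
        pvGet2_pvSet2_ne _ _ _ _ _ _ (Or.inl (Ne.symm hay))]

theorem pv_inner_eq (m0 : List (List Int)) (v other : Nat) (hother : other ≠ v) :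
    ∀ (l : List Nat) (m1 : List (List Int)) (td : List Nat),
      (∀ j, pvGet2 m1 v j = pvGet2 m0 v j) →
      l.foldl (fun (st3 : List (List Int) × List Nat) other2 =>
          if pvGet2 st3.1 v other2 ≠ 0 then
            (pvSet2 (pvSet2 st3.1 other other2 1) other v 0, st3.2 ++ [other2])
          else st3) (m1, td) =
      ((l.filter (fun s => pvGet2 m0 v s ≠ 0)).foldl
          (fun m s => pvSet2 (pvSet2 m other s 1) other v 0) m1,
       td ++ l.filter (fun s => pvGet2 m0 v s ≠ 0)) := by
  intro l
  induction l with
  | nil => intro m1 td _; simp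
  | cons x l ih =>
    intro m1 td hrow
    rw [List.foldl_cons, List.filter_cons]
    by_cases hx : pvGet2 m0 v x ≠ 0
    · have hx1 : pvGet2 m1 v x ≠ 0 := by rw [hrow]; exact hx
      rw [if_pos hx1]
      have hrow' : ∀ j, pvGet2 (pvSet2 (pvSet2 m1 other x 1) other v 0) v j = pvGet2 m0 v j := by
        intro j
        rw [pvGet2_pvSet2_ne _ _ _ _ _ _ (Or.inl hother),
            pvGet2_pvSet2_ne _ _ _ _ _ _ (Or.inl hother)]
        exact hrow j
      rw [ih _ _ hrow']
      simp [hx, List.append_assoc]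
    · have hx0 : pvGet2 m0 v x = 0 := not_not.mp hx
      have hx1 : ¬ pvGet2 m1 v x ≠ 0 := by rw [hrow]; exact hx
      rw [if_neg hx1, ih _ _ hrow]
      simp [hx0]

theorem pv_outer_eq (m0 : List (List Int)) (v : Nat) (hdiag : pvGet2 m0 v v = 0) :
    ∀ (l : List Nat), l.Nodup →
    ∀ (m1 : List (List Int)) (td : List Nat),
      (∀ y ∈ l, pvGet2 m1 y v = pvGet2 m0 y v) →
      (∀ j, pvGet2 m1 v j = pvGet2 m0 v j) →
      l.foldl (fun (st2 : List (List Int) × List Nat) other =>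
          if pvGet2 st2.1 other v ≠ 0 then
            (List.range 8).foldl (fun (st3 : List (List Int) × List Nat) other2 =>
                if pvGet2 st3.1 v other2 ≠ 0 then
                  (pvSet2 (pvSet2 st3.1 other other2 1) other v 0, st3.2 ++ [other2])
                else st3) st2
          else st2) (m1, td) =
      (l.filter (fun p => pvGet2 m0 p v ≠ 0)).foldl
          (fun (st : List (List Int) × List Nat) p =>
            (((List.range 8).filter (fun s => pvGet2 m0 v s ≠ 0)).foldl
                (fun m s => pvSet2 (pvSet2 m p s 1) p v 0) st.1,
             st.2 ++ (List.range 8).filter (fun s => pvGet2 m0 v s ≠ 0))) (m1, td) := by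
  intro l
  induction l with
  | nil => intro _ m1 td _ _; rfl
  | cons y l ih =>
    intro hnd m1 td hcol hrow
    have hynl : y ∉ l := (List.nodup_cons.mp hnd).1
    have hndl : l.Nodup := (List.nodup_cons.mp hnd).2
    rw [List.foldl_cons, List.filter_cons]
    by_cases hy : pvGet2 m0 y v ≠ 0
    · have hyv : y ≠ v := fun h => hy (h ▸ hdiag)
      have hy1 : pvGet2 m1 y v ≠ 0 := by rw [hcol y (List.mem_cons_self)]; exact hy
      rw [if_pos hy1, pv_inner_eq m0 v y hyv (List.range 8) m1 td hrow,
          if_pos (by simp [hy]), List.foldl_cons]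
      apply ih hndl
      · intro y' hy'
        rw [pv_interfold_get_ne v y _ y' v (fun h => hynl (h ▸ hy'))]
        exact hcol y' (List.mem_cons_of_mem _ hy')
      · intro j
        rw [pv_interfold_get_ne v y _ v j (Ne.symm hyv)]
        exact hrow j
    · have hy0 : pvGet2 m0 y v = 0 := not_not.mp hy
      have hy1 : ¬ pvGet2 m1 y v ≠ 0 := by rw [hcol y (List.mem_cons_self)]; exact hy
      rw [if_neg hy1, if_neg (by simp [hy0])]
      exact ih hndl m1 td (fun y' hy' => hcol y' (List.mem_cons_of_mem _ hy')) hrow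

theorem pv_pairfold_split (P S : List Nat) (v : Nat) :
    ∀ (m : List (List Int)) (td : List Nat),
    P.foldl (fun (st : List (List Int) × List Nat) p =>
        (S.foldl (fun m s => pvSet2 (pvSet2 m p s 1) p v 0) st.1, st.2 ++ S)) (m, td) =
    (P.foldl (fun m p => S.foldl (fun m s => pvSet2 (pvSet2 m p s 1) p v 0) m) m,
     td ++ P.flatMap (fun _ => S)) := by
  induction P with
  | nil => intro m td; simp
  | cons p P ih => intro m td; rw [List.foldl_cons, ih]; simp

theorem pv_clears_get (v : Nat) (S : List Nat) (a b : Nat) :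
    ∀ m, pvGet2 (S.foldl (fun m s => pvSet2 m v s 0) m) a b =
      if a = v ∧ b ∈ S then 0 else pvGet2 m a b := by
  induction S with
  | nil => intro m; simp
  | cons s S ih =>
    intro m
    rw [List.foldl_cons, ih]
    by_cases hav : a = v
    · by_cases hbs : b = s
      · subst hav; subst hbs
        by_cases hbS : b ∈ S
        · simp [hbS]
        · simp [hbS, pvGet2_pvSet2_zero_self]
      · subst hav
        have h2 := pvGet2_pvSet2_ne m a s a b 0 (Or.inr (Ne.symm hbs))
        by_cases hbS : b ∈ S
        · simp [hbS]
        · simp [hbs, hbS, h2]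
    · have h2 := pvGet2_pvSet2_ne m v s a b 0 (Or.inl (Ne.symm hav))
      simp [hav, h2]

theorem pv_clears_id (v : Nat) (S : List Nat) :
    ∀ m, (∀ s ∈ S, pvGet2 m v s = 0) → S.foldl (fun m s => pvSet2 m v s 0) m = m := by
  induction S with
  | nil => intro m _; rfl
  | cons s S ih =>
    intro m h
    rw [List.foldl_cons, pvSet2_self m v s 0 (h s List.mem_cons_self)]
    exact ih m (fun s' hs' => h s' (List.mem_cons_of_mem _ hs'))

theorem pv_clear_flat (v : Nat) (S P : List Nat) (hP : P ≠ []) :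
    ∀ m, (P.flatMap (fun _ => S)).foldl (fun m d => pvSet2 m v d 0) m =
      S.foldl (fun m d => pvSet2 m v d 0) m := by
  induction P with
  | nil => exact absurd rfl hP
  | cons p P ih =>
    intro m
    rw [List.flatMap_cons, List.foldl_append]
    by_cases hP' : P = []
    · subst hP'; simp
    · rw [ih hP']
      apply pv_clears_id
      intro s hs
      rw [pv_clears_get]
      simp [hs]

theorem pv_inter_plain (p v : Nat) (S : List Nat) (hvS : v ∉ S) :
    ∀ m, pvGet2 m p v = 0 →
      S.foldl (fun m s => pvSet2 (pvSet2 m p s 1) p v 0) m =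
      S.foldl (fun m s => pvSet2 m p s 1) m := by
  induction S with
  | nil => intro m _; rfl
  | cons s S ih =>
    intro m h
    have hsv : s ≠ v := fun hc => hvS (hc ▸ List.mem_cons_self)
    have h1 : pvGet2 (pvSet2 m p s 1) p v = 0 := by
      rw [pvGet2_pvSet2_ne _ _ _ _ _ _ (Or.inr hsv)]; exact h
    rw [List.foldl_cons, List.foldl_cons, pvSet2_self _ p v 0 h1]
    exact ih (fun h => hvS (List.mem_cons_of_mem _ h)) _ h1

theorem pv_perp (p v : Nat) (S : List Nat) (hvS : v ∉ S) (hS : S ≠ []) (m : List (List Int)) :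
    S.foldl (fun m s => pvSet2 (pvSet2 m p s 1) p v 0) m =
    S.foldl (fun m s => pvSet2 m p s 1) (pvSet2 m p v 0) := by
  cases S with
  | nil => exact absurd rfl hS
  | cons s S =>
    have hsv : s ≠ v := fun hc => hvS (hc ▸ List.mem_cons_self)
    have hvS' : v ∉ S := fun h => hvS (List.mem_cons_of_mem _ h)
    rw [List.foldl_cons, List.foldl_cons,
        pv_inter_plain p v S hvS' _ (pvGet2_pvSet2_zero_self _ p v),
        pvSet2_comm_col m p s v 1 0 hsv]

theorem pv_foldl_id (l : List Nat) (m : List (List Int)) :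
    l.foldl (fun m (_ : Nat) => m) m = m := by
  induction l with
  | nil => rfl
  | cons _ l ih => exact ih

-- the op == 1 loop in its pred/succ normal form
theorem pv_op1_eq (m : List (List Int)) (v : Nat) (hdiag : pvGet2 m v v = 0) :
    (let r := (List.range 8).foldl (fun (st2 : List (List Int) × List Nat) other =>
        if pvGet2 st2.1 other v ≠ 0 then
          (List.range 8).foldl (fun (st3 : List (List Int) × List Nat) other2 =>
              if pvGet2 st3.1 v other2 ≠ 0 then
                (pvSet2 (pvSet2 st3.1 other other2 1) other v 0, st3.2 ++ [other2])
              else st3) st2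
        else st2) (m, ([] : List Nat))
     r.2.foldl (fun m d => pvSet2 m v d 0) r.1) =
    (if (List.range 8).filter (fun p => pvGet2 m p v ≠ 0) ≠ [] ∧
        (List.range 8).filter (fun s => pvGet2 m v s ≠ 0) ≠ [] then
      ((List.range 8).filter (fun s => pvGet2 m v s ≠ 0)).foldl (fun acc s => pvSet2 acc v s 0)
        (((List.range 8).filter (fun p => pvGet2 m p v ≠ 0)).foldl
          (fun acc p => ((List.range 8).filter (fun s => pvGet2 m v s ≠ 0)).foldl
              (fun acc2 s => pvSet2 acc2 p s 1) (pvSet2 acc p v 0)) m)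
    else m) := by
  have h := pv_outer_eq m v hdiag (List.range 8) List.nodup_range m [] (fun _ _ => rfl) (fun _ => rfl)
  rw [pv_pairfold_split] at h
  show ((List.range 8).foldl _ (m, ([] : List Nat))).2.foldl _
        ((List.range 8).foldl _ (m, ([] : List Nat))).1 = _
  rw [h]
  simp only [List.nil_append, ne_eq, decide_not]
  by_cases hP : (List.range 8).filter (fun p => !decide (pvGet2 m p v = 0)) = []
  · rw [hP, if_neg (fun hc => hc.1 rfl)]
    rfl
  · by_cases hS : (List.range 8).filter (fun s => !decide (pvGet2 m v s = 0)) = []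
    · have h1 : (((List.range 8).filter (fun p => !decide (pvGet2 m p v = 0))).foldl
          (fun (m : List (List Int)) (p : Nat) =>
            List.foldl (fun m s => pvSet2 (pvSet2 m p s 1) p v 0) m []) m) = m := pv_foldl_id _ m
      have h2 : List.flatMap (fun (_ : Nat) => ([] : List Nat))
          ((List.range 8).filter (fun p => !decide (pvGet2 m p v = 0))) = [] := by simp
      rw [hS, if_neg (fun hc => hc.2 rfl), h1, h2]
      rfl
    · have hvS : v ∉ (List.range 8).filter (fun s => !decide (pvGet2 m v s = 0)) := by
        intro hmem
        rw [List.mem_filter] at hmem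
        have hne : ¬ pvGet2 m v v = 0 := by simpa using hmem.2
        exact hne hdiag
      have hbody : (fun (mm : List (List Int)) (p : Nat) =>
            ((List.range 8).filter (fun s => !decide (pvGet2 m v s = 0))).foldl
              (fun m s => pvSet2 (pvSet2 m p s 1) p v 0) mm) =
          (fun mm p => ((List.range 8).filter (fun s => !decide (pvGet2 m v s = 0))).foldl
              (fun acc2 s => pvSet2 acc2 p s 1) (pvSet2 mm p v 0)) :=
        funext fun mm => funext fun p => pv_perp p v _ hvS hS mm
      rw [pv_clear_flat v _ _ hP, hbody, if_pos (And.intro hP hS)]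

-- elementwise value of the rewiring folds
theorem pv_srow_get (p v1 : Nat) (S : List Nat) :
    ∀ m, pvSq8 m → p < 8 → (∀ s ∈ S, s < 8) →
    ∀ a b : Nat, a < 8 → b < 8 →
      pvGet2 (S.foldl (fun acc s => pvSet2 acc p s 1) m) a b =
        if a = p ∧ b ∈ S then 1 else pvGet2 m a b := by
  induction S with
  | nil => intro m _ _ _ a b _ _; simp
  | cons s S ih =>
    intro m hsq hp hS a b ha hb
    have hs8 : s < 8 := hS s List.mem_cons_self
    rw [List.foldl_cons, ih _ (pvSq8_pvSet2 _ hsq p s 1) hp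
        (fun x hx => hS x (List.mem_cons_of_mem _ hx)) a b ha hb]
    by_cases hap : a = p
    · subst hap
      by_cases hbS : b ∈ S
      · simp [hbS]
      · by_cases hbs : b = s
        · subst hbs
          rw [if_neg (by simp [hbS]), if_pos ⟨rfl, List.mem_cons_self⟩]
          exact pvGet2_pvSet2_self m a b 1 (by rw [hsq.1]; exact ha)
            (by rw [pvSq8_row m hsq a ha]; exact hb)
        · rw [if_neg (by simp [hbS]), if_neg (by simp [hbs, hbS]),
              pvGet2_pvSet2_ne _ _ _ _ _ _ (Or.inr (fun h => hbs h.symm))]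
    · rw [if_neg (by simp [hap]), if_neg (by simp [hap]),
          pvGet2_pvSet2_ne _ _ _ _ _ _ (Or.inl (fun h => hap h.symm))]

theorem pvSq8_srow (p v1 : Nat) (S : List Nat) (m : List (List Int)) (hsq : pvSq8 m) :
    pvSq8 (S.foldl (fun acc s => pvSet2 acc p s 1) m) :=
  List.foldlRecOn _ _ hsq (fun mm hm s _ => pvSq8_pvSet2 _ hm p s 1)

theorem pv_body_get (v : Nat) (S : List Nat) :
    ∀ (P : List Nat) (m : List (List Int)), pvSq8 m → v < 8 → (∀ p ∈ P, p < 8) → (∀ s ∈ S, s < 8) →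
    ∀ a b : Nat, a < 8 → b < 8 →
      pvGet2 (P.foldl (fun acc p => S.foldl (fun acc2 s => pvSet2 acc2 p s 1) (pvSet2 acc p v 0)) m) a b =
        if a ∈ P then (if b ∈ S then 1 else if b = v then 0 else pvGet2 m a b)
        else pvGet2 m a b := by
  intro P
  induction P with
  | nil => intro m _ _ _ _ a b _ _; simp
  | cons p P ih =>
    intro m hsq hv hP hS a b ha hb
    have hp8 : p < 8 := hP p List.mem_cons_self
    have hsq1 : pvSq8 (S.foldl (fun acc2 s => pvSet2 acc2 p s 1) (pvSet2 m p v 0)) :=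
      pvSq8_srow p v S _ (pvSq8_pvSet2 _ hsq p v 0)
    rw [List.foldl_cons, ih _ hsq1 hv (fun x hx => hP x (List.mem_cons_of_mem _ hx)) hS a b ha hb,
        pv_srow_get p v S _ (pvSq8_pvSet2 _ hsq p v 0) hp8 hS a b ha hb]
    by_cases haP : a ∈ P
    · rw [if_pos haP, if_pos (List.mem_cons_of_mem _ haP)]
      by_cases hbS : b ∈ S
      · simp [hbS]
      · by_cases hbv : b = v
        · simp [hbS, hbv]
        · rw [if_neg hbS, if_neg hbS, if_neg hbv, if_neg hbv]
          by_cases hap : a = p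
          · subst hap
            rw [if_neg (by simp [hbS]),
                pvGet2_pvSet2_ne _ _ _ _ _ _ (Or.inr (fun h => hbv h.symm))]
          · rw [if_neg (by simp [hap]),
                pvGet2_pvSet2_ne _ _ _ _ _ _ (Or.inl (fun h => hap h.symm))]
    · rw [if_neg haP]
      by_cases hap : a = p
      · subst hap
        rw [if_pos List.mem_cons_self]
        by_cases hbS : b ∈ S
        · simp [hbS]
        · by_cases hbv : b = v
          · subst hbv
            simp [hbS, pvGet2_pvSet2_zero_self m a b]
          · simp [hbS, hbv, pvGet2_pvSet2_ne m a v a b 0 (Or.inr (fun h => hbv h.symm))]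
      · rw [if_neg (by simp [hap]), if_neg (by simp [hap, haP]),
            pvGet2_pvSet2_ne _ _ _ _ _ _ (Or.inl (fun h => hap h.symm))]

theorem pvSq8_body (v : Nat) (S P : List Nat) (m : List (List Int)) (hsq : pvSq8 m) :
    pvSq8 (P.foldl (fun acc p => S.foldl (fun acc2 s => pvSet2 acc2 p s 1) (pvSet2 acc p v 0)) m) :=
  List.foldlRecOn _ _ hsq (fun mm hm p _ => pvSq8_srow p v S _ (pvSq8_pvSet2 _ hm p v 0))

theorem pvSq8_clears (v : Nat) (S : List Nat) (m : List (List Int)) (hsq : pvSq8 m) :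
    pvSq8 (S.foldl (fun acc s => pvSet2 acc v s 0) m) :=
  List.foldlRecOn _ _ hsq (fun mm hm s _ => pvSq8_pvSet2 _ hm v s 0)

-- ===== the simulation relation between A's matrix and B's edge set =====
def pvRel (m : List (List Int)) (E : List (Nat × Nat)) : Prop :=
  pvSq8 m ∧ pvUT m ∧ pv01 m ∧ (∀ e ∈ E, e.1 < 8 ∧ e.2 < 8) ∧
  (∀ a b : Nat, a < 8 → b < 8 → ((a, b) ∈ E ↔ pvGet2 m a b = 1))

theorem pv_mem_predsB (E : List (Nat × Nat)) (v x : Nat) :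
    x ∈ PySem.Set.ofList ((E.filter (fun e => e.2 = v)).map Prod.fst) ↔ (x, v) ∈ E := by
  rw [PySem.Set.mem_ofList]
  constructor
  · intro h
    obtain ⟨e, he, hx⟩ := List.mem_map.mp h
    obtain ⟨heE, hev⟩ := List.mem_filter.mp he
    have : e = (x, v) := by
      obtain ⟨e1, e2⟩ := e
      simp only [decide_eq_true_eq] at hev
      simp only at hx
      simp [hx, hev]
    exact this ▸ heE
  · intro h
    exact List.mem_map.mpr ⟨(x, v), List.mem_filter.mpr ⟨h, by simp⟩, rfl⟩

theorem pv_mem_succsB (E : List (Nat × Nat)) (v x : Nat) :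
    x ∈ PySem.Set.ofList ((E.filter (fun e => e.1 = v)).map Prod.snd) ↔ (v, x) ∈ E := by
  rw [PySem.Set.mem_ofList]
  constructor
  · intro h
    obtain ⟨e, he, hx⟩ := List.mem_map.mp h
    obtain ⟨heE, hev⟩ := List.mem_filter.mp he
    have : e = (v, x) := by
      obtain ⟨e1, e2⟩ := e
      simp only [decide_eq_true_eq] at hev
      simp only at hx
      simp [hx, hev]
    exact this ▸ heE
  · intro h
    exact List.mem_map.mpr ⟨(v, x), List.mem_filter.mpr ⟨h, by simp⟩, rfl⟩

theorem pv_mem_prodB (preds succs : List Nat) (a b : Nat) :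
    (a, b) ∈ preds.flatMap (fun p => succs.map (fun s => (p, s))) ↔ a ∈ preds ∧ b ∈ succs := by
  simp only [List.mem_flatMap, List.mem_map]
  constructor
  · rintro ⟨p, hp, s, hs, he⟩
    obtain ⟨rfl, rfl⟩ := Prod.mk.injEq .. ▸ (Prod.mk.inj he.symm)
    exact ⟨hp, hs⟩
  · rintro ⟨hp, hs⟩
    exact ⟨a, hp, b, hs, rfl⟩

-- one op: the relation is preserved, and the labels move as stated
set_option maxHeartbeats 1600000 in
theorem pv_step_rel (m : List (List Int)) (E : List (Nat × Nat)) (labels : List (Option String))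
    (x : Int × Nat) (hv : x.2 + 1 < 8) (h : pvRel m E) :
    pvRel (pvOpStepA (m, labels) x).1 (pvEStep E x) ∧
    (pvOpStepA (m, labels) x).2 =
      (if x.1 = 0 ∨ x.1 = 1 then labels else labels.set (x.2 + 1) (some (PySem.Int.toStr x.1))) := by
  obtain ⟨hsq, hut, h01, hEb, hiff⟩ := h
  set v := x.2 + 1 with hvdef
  by_cases h0 : x.1 = 0
  · -- zero op
    have hA : pvOpStepA (m, labels) x =
        ((List.range 8).foldl (fun m other => pvSet2 (pvSet2 m other v 0) v other 0) m, labels) := by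
      simp only [pvOpStepA]
      rw [if_pos h0, pv_op0_eq]
    have hB : pvEStep E x = E.filter (fun e => ¬(e.1 = v ∨ e.2 = v)) := by
      simp only [pvEStep]
      rw [if_pos h0]
    rw [hA, hB]
    have hget : ∀ a b : Nat, a < 8 → b < 8 →
        pvGet2 ((List.range 8).foldl (fun m o => pvSet2 (pvSet2 m o v 0) v o 0) m) a b =
          if a = v ∨ b = v then 0 else pvGet2 m a b := by
      intro a b ha hb
      rw [pv_zr_get v (List.range 8) m hsq hv a b ha hb]
      have ha' := List.mem_range.mpr ha
      have hb' := List.mem_range.mpr hb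
      by_cases hav : a = v <;> by_cases hbv : b = v <;>
        simp [hav, hbv, ha', hb'] <;>
        (intro h8; exact absurd h8 (by omega))
    refine ⟨⟨pvSq8_zr v (List.range 8) m hsq, ?_, ?_, ?_, ?_⟩, by simp [h0]⟩
    · intro i j hi hj hji
      rw [hget i j hi hj]
      split
      · rfl
      · exact hut i j hi hj hji
    · intro a b ha hb
      rw [hget a b ha hb]
      split
      · exact Or.inl rfl
      · exact h01 a b ha hb
    · intro e he
      exact hEb e (List.mem_filter.mp he).1
    · intro a b ha hb
      rw [hget a b ha hb, List.mem_filter]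
      by_cases hc : a = v ∨ b = v
      · rw [if_pos hc]
        constructor
        · rintro ⟨-, hdec⟩
          simp only [decide_eq_true_eq] at hdec
          exact absurd hc (by simpa using hdec)
        · intro h10; exact absurd h10.symm (by norm_num)
      · rw [if_neg hc]
        rw [hiff a b ha hb]
        simp [hc]
  · by_cases h1 : x.1 = 1
    · -- skip-connection
      have hdiag : pvGet2 m v v = 0 := hut v v hv hv le_rfl
      have hA : pvOpStepA (m, labels) x =
          ((if (List.range 8).filter (fun p => pvGet2 m p v ≠ 0) ≠ [] ∧
              (List.range 8).filter (fun s => pvGet2 m v s ≠ 0) ≠ [] then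
            ((List.range 8).filter (fun s => pvGet2 m v s ≠ 0)).foldl (fun acc s => pvSet2 acc v s 0)
              (((List.range 8).filter (fun p => pvGet2 m p v ≠ 0)).foldl
                (fun acc p => ((List.range 8).filter (fun s => pvGet2 m v s ≠ 0)).foldl
                    (fun acc2 s => pvSet2 acc2 p s 1) (pvSet2 acc p v 0)) m)
          else m), labels) := by
        simp only [pvOpStepA]
        rw [if_neg h0, if_pos h1]
        exact congrArg₂ Prod.mk (pv_op1_eq m v hdiag) rfl
      set P := (List.range 8).filter (fun p => pvGet2 m p v ≠ 0) with hPdef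
      set S := (List.range 8).filter (fun s => pvGet2 m v s ≠ 0) with hSdef
      set preds := PySem.Set.ofList ((E.filter (fun e => e.2 = v)).map Prod.fst) with hpredsdef
      set succs := PySem.Set.ofList ((E.filter (fun e => e.1 = v)).map Prod.snd) with hsuccsdef
      have hmemP : ∀ y, y ∈ P ↔ (y < 8 ∧ pvGet2 m y v ≠ 0) := by
        intro y; rw [hPdef, List.mem_filter, List.mem_range]; simp
      have hmemS : ∀ y, y ∈ S ↔ (y < 8 ∧ pvGet2 m v y ≠ 0) := by
        intro y; rw [hSdef, List.mem_filter, List.mem_range]; simp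
      have hPpreds : ∀ y, y ∈ preds ↔ y ∈ P := by
        intro y
        rw [hpredsdef, pv_mem_predsB, hmemP]
        constructor
        · intro hy
          have hy8 := (hEb _ hy).1
          exact ⟨hy8, by rw [(hiff y v hy8 hv).mp hy]; norm_num⟩
        · rintro ⟨hy8, hne⟩
          rcases h01 y v hy8 hv with hz | ho
          · exact absurd hz hne
          · exact (hiff y v hy8 hv).mpr ho
      have hSsuccs : ∀ y, y ∈ succs ↔ y ∈ S := by
        intro y
        rw [hsuccsdef, pv_mem_succsB, hmemS]
        constructor
        · intro hy
          have hy8 := (hEb _ hy).2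
          exact ⟨hy8, by rw [(hiff v y hv hy8).mp hy]; norm_num⟩
        · rintro ⟨hy8, hne⟩
          rcases h01 v y hv hy8 with hz | ho
          · exact absurd hz hne
          · exact (hiff v y hv hy8).mpr ho
      have hguard : (preds ≠ [] ∧ succs ≠ []) ↔ (P ≠ [] ∧ S ≠ []) := by
        have e1 : preds ≠ [] ↔ P ≠ [] := not_congr (by
          rw [List.eq_nil_iff_forall_not_mem, List.eq_nil_iff_forall_not_mem]
          exact forall_congr' (fun y => not_congr (hPpreds y)))
        have e2 : succs ≠ [] ↔ S ≠ [] := not_congr (by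
          rw [List.eq_nil_iff_forall_not_mem, List.eq_nil_iff_forall_not_mem]
          exact forall_congr' (fun y => not_congr (hSsuccs y)))
        rw [e1, e2]
      have hB : pvEStep E x =
          (if preds ≠ [] ∧ succs ≠ [] then
            PySem.Set.ofList (E.filter (fun e => ¬(e.1 = v ∨ e.2 = v)) ++
              preds.flatMap (fun p => succs.map (fun s => (p, s))))
          else E) := by
        simp only [pvEStep]
        rw [if_neg h0, if_pos h1]
      rw [hA, hB]
      by_cases hg : P ≠ [] ∧ S ≠ []
      · rw [if_pos hg, if_pos (hguard.mpr hg)]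
        have hP8 : ∀ p ∈ P, p < 8 := fun p hp => ((hmemP p).mp hp).1
        have hS8 : ∀ s ∈ S, s < 8 := fun s hs => ((hmemS s).mp hs).1
        have hPlt : ∀ p ∈ P, p < v := by
          intro p hp
          obtain ⟨hp8, hne⟩ := (hmemP p).mp hp
          by_contra hc
          exact hne (hut p v hp8 hv (le_of_not_gt hc))
        have hSgt : ∀ s ∈ S, v < s := by
          intro s hs
          obtain ⟨hs8, hne⟩ := (hmemS s).mp hs
          by_contra hc
          exact hne (hut v s hv hs8 (le_of_not_gt hc))
        have hvP : v ∉ P := fun hc => absurd rfl (Nat.ne_of_lt (hPlt v hc)).symm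
        have hvS : v ∉ S := fun hc => absurd rfl (Nat.ne_of_lt (hSgt v hc))
        have hsqB : pvSq8 (P.foldl (fun acc p => S.foldl (fun acc2 s => pvSet2 acc2 p s 1)
            (pvSet2 acc p v 0)) m) := pvSq8_body v S P m hsq
        have hget : ∀ a b : Nat, a < 8 → b < 8 →
            pvGet2 (S.foldl (fun acc s => pvSet2 acc v s 0)
                (P.foldl (fun acc p => S.foldl (fun acc2 s => pvSet2 acc2 p s 1)
                  (pvSet2 acc p v 0)) m)) a b =
              if a = v ∧ b ∈ S then 0
              else if a ∈ P then (if b ∈ S then 1 else if b = v then 0 else pvGet2 m a b)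
              else pvGet2 m a b := by
          intro a b ha hb
          rw [pv_clears_get v S a b _, pv_body_get v S P m hsq hv hP8 hS8 a b ha hb]
        refine ⟨⟨pvSq8_clears v S _ hsqB, ?_, ?_, ?_, ?_⟩, by simp [h0, h1]⟩
        · -- upper-triangular
          intro i j hi hj hji
          rw [hget i j hi hj]
          by_cases c1 : i = v ∧ j ∈ S
          · rw [if_pos c1]
          · rw [if_neg c1]
            by_cases c2 : i ∈ P
            · rw [if_pos c2]
              by_cases c3 : j ∈ S
              · exact absurd (lt_trans (hPlt i c2) (hSgt j c3)) (by omega)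
              · rw [if_neg c3]
                by_cases c4 : j = v
                · rw [if_pos c4]
                · rw [if_neg c4]
                  exact hut i j hi hj hji
            · rw [if_neg c2]
              exact hut i j hi hj hji
        · -- 0/1 valued
          intro a b ha hb
          rw [hget a b ha hb]
          split
          · exact Or.inl rfl
          · split
            · split
              · exact Or.inr rfl
              · split
                · exact Or.inl rfl
                · exact h01 a b ha hb
            · exact h01 a b ha hb
        · -- edge bounds
          intro e he
          rw [PySem.Set.mem_ofList, List.mem_append] at he
          rcases he with he | he
          · exact hEb e (List.mem_filter.mp he).1
          · obtain ⟨a, b⟩ := e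
            obtain ⟨hp, hs⟩ := (pv_mem_prodB preds succs a b).mp he
            exact ⟨hP8 a ((hPpreds a).mp hp), hS8 b ((hSsuccs b).mp hs)⟩
        · -- membership ↔ value 1
          intro a b ha hb
          rw [PySem.Set.mem_ofList, List.mem_append, pv_mem_prodB, hget a b ha hb]
          have hfilt : (a, b) ∈ E.filter (fun e => ¬(e.1 = v ∨ e.2 = v)) ↔
              (pvGet2 m a b = 1 ∧ ¬(a = v ∨ b = v)) := by
            rw [List.mem_filter, hiff a b ha hb]
            simp
          rw [hfilt, hPpreds a, hSsuccs b]
          by_cases cP : a ∈ P ∧ b ∈ S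
          · have hav : a ≠ v := fun hc => hvP (hc ▸ cP.1)
            rw [if_neg (fun hc => hav hc.1), if_pos cP.1, if_pos cP.2]
            simp [cP]
          · constructor
            · rintro (⟨h1v, hnv⟩ | hPS)
              · -- old edge, away from v
                have hav : a ≠ v := fun hc => hnv (Or.inl hc)
                have hbv : b ≠ v := fun hc => hnv (Or.inr hc)
                rw [if_neg (fun hc => hav hc.1)]
                by_cases c2 : a ∈ P
                · rw [if_pos c2]
                  by_cases c3 : b ∈ S
                  · exact absurd ⟨c2, c3⟩ cP
                  · rw [if_neg c3, if_neg hbv]; exact h1v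
                · rw [if_neg c2]; exact h1v
              · exact absurd hPS cP
            · intro hval
              by_cases hav : a = v
              · exfalso
                by_cases hbS : b ∈ S
                · rw [if_pos ⟨hav, hbS⟩] at hval
                  exact absurd hval.symm (by norm_num)
                · rw [if_neg (fun hc => hbS hc.2), if_neg (hav ▸ hvP)] at hval
                  have hb0 : pvGet2 m a b ≠ 0 := by rw [hval]; norm_num
                  exact hbS ((hmemS b).mpr ⟨hb, hav ▸ hb0⟩)
              · rw [if_neg (fun hc => hav hc.1)] at hval
                by_cases c2 : a ∈ P
                · rw [if_pos c2] at hval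
                  by_cases c3 : b ∈ S
                  · exact absurd ⟨c2, c3⟩ cP
                  · rw [if_neg c3] at hval
                    by_cases c4 : b = v
                    · rw [if_pos c4] at hval
                      exact absurd hval.symm (by norm_num)
                    · rw [if_neg c4] at hval
                      exact Or.inl ⟨hval, fun hc => (hc.elim hav c4)⟩
                · rw [if_neg c2] at hval
                  by_cases c4 : b = v
                  · exfalso
                    have ha0 : pvGet2 m a v ≠ 0 := by rw [← c4, hval]; norm_num
                    exact c2 ((hmemP a).mpr ⟨ha, ha0⟩)
                  · exact Or.inl ⟨hval, fun hc => (hc.elim hav c4)⟩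
      · rw [if_neg hg, if_neg (fun hc => hg (hguard.mp hc))]
        exact ⟨⟨hsq, hut, h01, hEb, hiff⟩, by simp [h0, h1]⟩
    · -- a labelled op
      have hA : pvOpStepA (m, labels) x = (m, labels.set v (some (PySem.Int.toStr x.1))) := by
        simp only [pvOpStepA]
        rw [if_neg h0, if_neg h1]
      have hB : pvEStep E x = E := by
        simp only [pvEStep]
        rw [if_neg h0, if_neg h1]
      rw [hA, hB]
      exact ⟨⟨hsq, hut, h01, hEb, hiff⟩, by simp [h0, h1]⟩

-- ===== list getD/set helpers (shared by the labels and reachability proofs) =====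
theorem pv_getD_set_ne {α : Type} (l : List α) (i j : Nat) (x d : α) (h : i ≠ j) :
    (l.set i x).getD j d = l.getD j d := by
  simp [List.getD, List.getElem?_set, h]

theorem pv_getD_set_self {α : Type} (l : List α) (i : Nat) (x d : α) (h : i < l.length) :
    (l.set i x).getD i d = x := by
  simp [List.getD, List.getElem?_set, h]

-- ===== B's closed-form labels match A's in-loop label assignments =====
theorem pv_lab_append (g : List Int) (a : Int) (hlen : g.length + 1 ≤ 7) (v : Nat) :
    pvLab (g ++ [a]) v =
      if v = g.length + 1 then
        (if a ≠ 0 ∧ a ≠ 1 then some (PySem.Int.toStr a)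
         else if v = 7 then some "output" else none)
      else pvLab g v := by
  unfold pvLab
  by_cases hveq : v = g.length + 1
  · subst hveq
    have hgetD : (g ++ [a]).getD g.length 0 = a := by
      rw [List.getD, List.getElem?_append_right le_rfl]
      simp
    rw [if_pos rfl]
    simp only [List.length_append, List.length_cons, List.length_nil, Nat.add_sub_cancel]
    rw [hgetD]
    by_cases hcase : a ≠ 0 ∧ a ≠ 1
    · rw [if_pos ⟨by omega, by simp, hcase.1, hcase.2⟩, if_pos hcase]
    · rw [if_neg (by tauto), if_neg hcase, if_neg (by omega)]
  · rw [if_neg hveq]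
    by_cases hv0 : v = 0
    · subst hv0
      rw [if_neg (fun h => absurd h.1 (by omega))]
      simp
    · by_cases hvle : v ≤ g.length
      · have hidx : v - 1 < g.length := by omega
        have hgetD : (g ++ [a]).getD (v - 1) 0 = g.getD (v - 1) 0 := by
          rw [List.getD, List.getD, List.getElem?_append_left hidx]
        rw [hgetD]
        have hcond : (1 ≤ v ∧ v ≤ (g ++ [a]).length ∧ g.getD (v-1) 0 ≠ 0 ∧ g.getD (v-1) 0 ≠ 1) ↔
            (1 ≤ v ∧ v ≤ g.length ∧ g.getD (v-1) 0 ≠ 0 ∧ g.getD (v-1) 0 ≠ 1) := by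
          simp only [List.length_append, List.length_cons, List.length_nil]
          constructor
          · rintro ⟨h1, _, h3, h4⟩; exact ⟨h1, hvle, h3, h4⟩
          · rintro ⟨h1, _, h3, h4⟩; exact ⟨h1, by omega, h3, h4⟩
        by_cases hc : 1 ≤ v ∧ v ≤ g.length ∧ g.getD (v-1) 0 ≠ 0 ∧ g.getD (v-1) 0 ≠ 1
        · rw [if_pos (hcond.mpr hc), if_pos hc]
        · rw [if_neg (fun h => hc (hcond.mp h)), if_neg hc]
      · have h1 : ¬ (1 ≤ v ∧ v ≤ (g ++ [a]).length ∧ (g ++ [a]).getD (v-1) 0 ≠ 0 ∧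
            (g ++ [a]).getD (v-1) 0 ≠ 1) := by
          simp only [List.length_append, List.length_cons, List.length_nil]
          rintro ⟨-, hle, -, -⟩
          omega
        have h2 : ¬ (1 ≤ v ∧ v ≤ g.length ∧ g.getD (v-1) 0 ≠ 0 ∧ g.getD (v-1) 0 ≠ 1) := by
          rintro ⟨-, hle, -, -⟩
          omega
        rw [if_neg h1, if_neg h2]

theorem pv_init_rel : pvRel pvInitMatrixA pvEdges0 := by
  have hut : ∀ i, i < 8 → ∀ j, j < 8 → j ≤ i → pvGet2 pvInitMatrixA i j = 0 := by decide
  have h01 : ∀ a, a < 8 → ∀ b, b < 8 →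
      pvGet2 pvInitMatrixA a b = 0 ∨ pvGet2 pvInitMatrixA a b = 1 := by decide
  have hiff : ∀ a, a < 8 → ∀ b, b < 8 →
      ((a, b) ∈ pvEdges0 ↔ pvGet2 pvInitMatrixA a b = 1) := by decide
  exact ⟨⟨by decide, by decide⟩, fun i j hi hj => hut i hi j hj,
    fun a b ha hb => h01 a ha b hb, by decide, fun a b ha hb => hiff a ha b hb⟩

-- ===== the op loop: A's state is related to B's edge set and labelled by pvLab =====
theorem pv_loop (g : List Int) (hg : g.length ≤ 7) :
    pvRel ((List.zipIdx g).foldl pvOpStepA (pvInitMatrixA, pvInitLabelsA)).1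
        ((List.zipIdx g).foldl pvEStep pvEdges0) ∧
    ((List.zipIdx g).foldl pvOpStepA (pvInitMatrixA, pvInitLabelsA)).2.length = 8 ∧
    (∀ v : Nat, v < 8 →
      ((List.zipIdx g).foldl pvOpStepA (pvInitMatrixA, pvInitLabelsA)).2.getD v none = pvLab g v) := by
  induction g using List.reverseRecOn with
  | nil => exact ⟨pv_init_rel, by decide, by decide⟩
  | append_singleton g a ih =>
    have hlen8 : (g ++ [a]).length = g.length + 1 := by simp
    have hg1 : g.length + 1 ≤ 7 := by rw [← hlen8]; exact hg
    have hg' : g.length ≤ 7 := by omega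
    obtain ⟨ihrel, ihlen, ihlab⟩ := ih hg'
    have hzip : (g ++ [a]).zipIdx = g.zipIdx ++ [(a, g.length)] := by
      rw [List.zipIdx_append]
      simp [List.zipIdx]
    set stA := (List.zipIdx g).foldl pvOpStepA (pvInitMatrixA, pvInitLabelsA) with hstA
    set EB := (List.zipIdx g).foldl pvEStep pvEdges0 with hEB
    have hv8 : (g.length : Nat) + 1 < 8 := by omega
    have hstep := pv_step_rel stA.1 EB stA.2 (a, g.length) (by simpa using hv8) ihrel
    have hsplitA : ((g ++ [a]).zipIdx).foldl pvOpStepA (pvInitMatrixA, pvInitLabelsA) =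
        pvOpStepA stA (a, g.length) := by
      rw [hzip, List.foldl_append, ← hstA]
      rfl
    have hsplitB : ((g ++ [a]).zipIdx).foldl pvEStep pvEdges0 = pvEStep EB (a, g.length) := by
      rw [hzip, List.foldl_append, ← hEB]
      rfl
    have hA1 : pvOpStepA (stA.1, stA.2) (a, g.length) = pvOpStepA stA (a, g.length) := rfl
    rw [hsplitA, hsplitB]
    rw [hA1] at hstep
    refine ⟨hstep.1, ?_, ?_⟩
    · rw [hstep.2]
      split
      · exact ihlen
      · rw [List.length_set]; exact ihlen
    · intro v hv
      rw [hstep.2, pv_lab_append g a hg1 v]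
      by_cases hveq : v = g.length + 1
      · rw [if_pos hveq]
        by_cases hcase : a = 0 ∨ a = 1
        · rw [if_pos hcase, if_neg (by tauto), hveq, ihlab _ (hveq ▸ hv)]
          unfold pvLab
          rw [if_neg (by rintro ⟨-, hle, -, -⟩; omega), if_neg (by omega)]
        · rw [if_neg hcase, if_pos (by tauto), hveq,
              pv_getD_set_self _ _ _ _ (by rw [ihlen]; exact hveq ▸ hv)]
      · rw [if_neg hveq]
        split
        · exact ihlab v hv
        · rw [pv_getD_set_ne _ _ _ _ _ (fun h => hveq h.symm)]
          exact ihlab v hv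

-- ===== A's stack loop: closure and minimality of the visited vector =====
theorem pv_guard_iff (vis : List Bool) (w : Nat) :
    vis.getD w true = false ↔ w < vis.length ∧ vis.getD w false = false := by
  by_cases h : w < vis.length
  · rw [List.getD_eq_getElem _ _ h, List.getD_eq_getElem _ _ h]
    simp [h]
  · rw [List.getD_eq_default _ _ (le_of_not_gt h), List.getD_eq_default _ _ (le_of_not_gt h)]
    simp [h]

theorem pv_cF_mono : ∀ (a b : List Bool), a.length = b.length →
    (∀ i, a.getD i false = true → b.getD i false = true) →
    b.count false ≤ a.count false := by
  intro a
  induction a with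
  | nil =>
    intro b hl _
    cases b with
    | nil => exact le_rfl
    | cons y ys => simp at hl
  | cons x xs ih =>
    intro b hl himp
    cases b with
    | nil => simp at hl
    | cons y ys =>
      have h0 := himp 0
      have ht : ∀ i, xs.getD i false = true → ys.getD i false = true := by
        intro i hi
        have := himp (i + 1) (by simpa using hi)
        simpa using this
      have hrec := ih ys (by simpa using hl) ht
      simp only [List.getD_cons_zero] at h0
      by_cases hx : x = true
      · have hy : y = true := h0 (by rw [hx])
        rw [hx, hy]
        simpa [List.count_cons] using hrec
      · have hx' : x = false := by simpa using hx
        rw [hx']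
        cases y <;> simp [List.count_cons] <;> omega

theorem pv_cF_set_true : ∀ (vis : List Bool) (v : Nat), vis.getD v false = false →
    v < vis.length → (vis.set v true).count false + 1 = vis.count false := by
  intro vis
  induction vis with
  | nil => intro v _ h; simp at h
  | cons x xs ih =>
    intro v h0 hlt
    cases v with
    | zero =>
      have hx : x = false := by simpa using h0
      subst hx
      simp [List.count_cons]
    | succ v =>
      have h0' : xs.getD v false = false := by simpa using h0
      have hlt' : v < xs.length := by simpa using hlt
      have := ih v h0' hlt'
      simp only [List.set_cons_succ, List.count_cons]
      cases x <;> simp_all <;> omega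

theorem pv_bfs_fold (conf : Nat → Nat → Int) (v : Nat) :
    ∀ (l : List Nat), (∀ w ∈ l, w < 8) →
    ∀ (q : List Nat) (vis : List Bool), vis.length = 8 →
    (l.foldl (fun (st : List Nat × List Bool) other =>
        if st.2.getD other true = false ∧ conf v other ≠ 0 then
          (st.1 ++ [other], st.2.set other true)
        else st) (q, vis)).2.length = 8 ∧
    (∀ i, vis.getD i false = true →
      (l.foldl (fun (st : List Nat × List Bool) other =>
        if st.2.getD other true = false ∧ conf v other ≠ 0 then
          (st.1 ++ [other], st.2.set other true)
        else st) (q, vis)).2.getD i false = true) ∧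
    ((l.foldl (fun (st : List Nat × List Bool) other =>
        if st.2.getD other true = false ∧ conf v other ≠ 0 then
          (st.1 ++ [other], st.2.set other true)
        else st) (q, vis)).2.count false +
     (l.foldl (fun (st : List Nat × List Bool) other =>
        if st.2.getD other true = false ∧ conf v other ≠ 0 then
          (st.1 ++ [other], st.2.set other true)
        else st) (q, vis)).1.length = vis.count false + q.length) ∧
    (∀ y ∈ q, y ∈ (l.foldl (fun (st : List Nat × List Bool) other =>
        if st.2.getD other true = false ∧ conf v other ≠ 0 then
          (st.1 ++ [other], st.2.set other true)
        else st) (q, vis)).1) ∧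
    ((∀ y ∈ q, vis.getD y false = true) →
      ∀ y ∈ (l.foldl (fun (st : List Nat × List Bool) other =>
        if st.2.getD other true = false ∧ conf v other ≠ 0 then
          (st.1 ++ [other], st.2.set other true)
        else st) (q, vis)).1,
        (l.foldl (fun (st : List Nat × List Bool) other =>
        if st.2.getD other true = false ∧ conf v other ≠ 0 then
          (st.1 ++ [other], st.2.set other true)
        else st) (q, vis)).2.getD y false = true) ∧
    (∀ i, (l.foldl (fun (st : List Nat × List Bool) other =>
        if st.2.getD other true = false ∧ conf v other ≠ 0 then
          (st.1 ++ [other], st.2.set other true)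
        else st) (q, vis)).2.getD i false = true →
      vis.getD i false = true ∨ i ∈ (l.foldl (fun (st : List Nat × List Bool) other =>
        if st.2.getD other true = false ∧ conf v other ≠ 0 then
          (st.1 ++ [other], st.2.set other true)
        else st) (q, vis)).1) ∧
    (∀ w ∈ l, conf v w ≠ 0 →
      (l.foldl (fun (st : List Nat × List Bool) other =>
        if st.2.getD other true = false ∧ conf v other ≠ 0 then
          (st.1 ++ [other], st.2.set other true)
        else st) (q, vis)).2.getD w false = true) ∧
    (∀ T : Nat → Prop, (∀ a b, T a → b < 8 → conf a b ≠ 0 → T b) →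
      (∀ i, vis.getD i false = true → T i) → T v →
      ∀ i, (l.foldl (fun (st : List Nat × List Bool) other =>
        if st.2.getD other true = false ∧ conf v other ≠ 0 then
          (st.1 ++ [other], st.2.set other true)
        else st) (q, vis)).2.getD i false = true → T i) := by
  intro l
  induction l with
  | nil =>
    intro _ q vis hlen
    refine ⟨hlen, fun i h => h, by simp, fun y hy => hy, fun h y hy => h y hy,
            fun i h => Or.inl h, by simp, fun T _ hsub _ i hi => hsub i hi⟩
  | cons w l ih =>
    intro hl q vis hlen
    have hw8 : w < 8 := hl w List.mem_cons_self
    have hl' : ∀ w ∈ l, w < 8 := fun w hw => hl w (List.mem_cons_of_mem _ hw)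
    rw [List.foldl_cons]
    by_cases hc : vis.getD w true = false ∧ conf v w ≠ 0
    · rw [if_pos hc]
      obtain ⟨hwlt, hwf⟩ := (pv_guard_iff vis w).mp hc.1
      have hlen' : (vis.set w true).length = 8 := by rw [List.length_set]; exact hlen
      obtain ⟨c1, c2, c3, c4, c5, c6, c7, c8⟩ := ih hl' (q ++ [w]) (vis.set w true) hlen'
      have hmono : ∀ i, vis.getD i false = true → (vis.set w true).getD i false = true := by
        intro i hi
        by_cases hiw : i = w
        · subst hiw; exact pv_getD_set_self vis i true false hwlt
        · rw [pv_getD_set_ne vis w i true false (fun h => hiw h.symm)]; exact hi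
      have hwtv : (vis.set w true).getD w false = true := pv_getD_set_self vis w true false hwlt
      refine ⟨c1, fun i hi => c2 i (hmono i hi), ?_, ?_, ?_, ?_, ?_, ?_⟩
      · rw [c3, List.length_append]
        have := pv_cF_set_true vis w hwf hwlt
        simp
        omega
      · exact fun y hy => c4 y (List.mem_append_left _ hy)
      · intro hq y hy
        exact c5 (fun y' hy' => by
          rcases List.mem_append.mp hy' with h | h
          · exact hmono y' (hq y' h)
          · rw [List.mem_singleton.mp h]; exact hwtv) y hy
      · intro i hi
        rcases c6 i hi with h | h
        · by_cases hiw : i = w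
          · subst hiw; exact Or.inr (c4 i (List.mem_append_right _ (by simp)))
          · rw [pv_getD_set_ne vis w i true false (fun h' => hiw h'.symm)] at h
            exact Or.inl h
        · exact Or.inr h
      · intro w' hw' hcw'
        rcases List.mem_cons.mp hw' with h | h
        · subst h; exact c2 w' hwtv
        · exact c7 w' h hcw'
      · intro T hgood hsub hv i hi
        refine c8 T hgood ?_ hv i hi
        intro i' hi'
        by_cases hiw : i' = w
        · subst hiw; exact hgood v i' hv hw8 hc.2
        · rw [pv_getD_set_ne vis w i' true false (fun h' => hiw h'.symm)] at hi'
          exact hsub i' hi'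
    · rw [if_neg hc]
      obtain ⟨c1, c2, c3, c4, c5, c6, c7, c8⟩ := ih hl' q vis hlen
      refine ⟨c1, c2, c3, c4, c5, c6, ?_, c8⟩
      intro w' hw' hcw'
      rcases List.mem_cons.mp hw' with h | h
      · subst h
        have : ¬ vis.getD w' true = false := fun hf => hc ⟨hf, hcw'⟩
        have htv : vis.getD w' false = true := by
          have hlt : w' < vis.length := by rw [hlen]; exact hl w' hw'
          rw [List.getD_eq_getElem vis true hlt] at this
          rw [List.getD_eq_getElem vis false hlt]
          simpa using this
        exact c2 w' htv
      · exact c7 w' h hcw'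

theorem pv_bfs_main (conf : Nat → Nat → Int) :
    ∀ (fuel : Nat) (q : List Nat) (vis : List Bool), vis.length = 8 →
    9 * vis.count false + q.length ≤ fuel →
    (∀ y ∈ q, vis.getD y false = true) →
    (∀ i, vis.getD i false = true → i ∈ q ∨ (∀ b, b < 8 → conf i b ≠ 0 → vis.getD b false = true)) →
    (pvBfsA conf fuel q vis).length = 8 ∧
    (∀ i, vis.getD i false = true → (pvBfsA conf fuel q vis).getD i false = true) ∧
    (∀ i, (pvBfsA conf fuel q vis).getD i false = true →
      ∀ b, b < 8 → conf i b ≠ 0 → (pvBfsA conf fuel q vis).getD b false = true) ∧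
    (∀ T : Nat → Prop, (∀ a b, T a → b < 8 → conf a b ≠ 0 → T b) →
      (∀ i, vis.getD i false = true → T i) → ∀ i, (pvBfsA conf fuel q vis).getD i false = true → T i) := by
  intro fuel
  induction fuel with
  | zero =>
    intro q vis hlen hfuel hq hexp
    have hq0 : q = [] := List.eq_nil_of_length_eq_zero (by omega)
    subst hq0
    refine ⟨hlen, fun i h => h, ?_, fun T _ hsub i hi => hsub i hi⟩
    intro i hi b hb hcb
    rcases hexp i hi with h | h
    · simp at h
    · exact h b hb hcb
  | succ fuel ih =>
    intro q vis hlen hfuel hq hexp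
    cases hql : q.getLast? with
    | none =>
      have hq0 : q = [] := List.getLast?_eq_none_iff.mp hql
      subst hq0
      rw [show pvBfsA conf (fuel+1) [] vis = vis from rfl]
      refine ⟨hlen, fun i h => h, ?_, fun T _ hsub i hi => hsub i hi⟩
      intro i hi b hb hcb
      rcases hexp i hi with h | h
      · simp at h
      · exact h b hb hcb
    | some v =>
      have hqeq : q.dropLast ++ [v] = q := List.dropLast_append_getLast? v hql
      have hvq : v ∈ q := List.mem_of_getLast? hql
      have hqne : q ≠ [] := by intro h; subst h; simp at hvq
      obtain ⟨c1, c2, c3, c4, c5, c6, c7, c8⟩ :=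
        pv_bfs_fold conf v (List.range 8) (fun w hw => List.mem_range.mp hw) q.dropLast vis hlen
      set F := (List.range 8).foldl (fun (st : List Nat × List Bool) other =>
          if st.2.getD other true = false ∧ conf v other ≠ 0 then
            (st.1 ++ [other], st.2.set other true)
          else st) (q.dropLast, vis) with hF
      have hstep : pvBfsA conf (fuel+1) q vis = pvBfsA conf fuel F.1 F.2 := by
        simp only [pvBfsA, hql]
        rfl
      have hcf : F.2.count false ≤ vis.count false :=
        pv_cF_mono vis F.2 (by rw [hlen, c1]) c2
      have hdl : q.dropLast.length = q.length - 1 := by simp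
      have hqpos : 1 ≤ q.length := List.length_pos_iff.mpr hqne
      have hfuel1 : 9 * F.2.count false + F.1.length ≤ fuel := by omega
      have hq1 : ∀ y ∈ F.1, F.2.getD y false = true :=
        c5 (fun y hy => hq y (by rw [← hqeq]; exact List.mem_append_left _ hy))
      have hexp1 : ∀ i, F.2.getD i false = true →
          i ∈ F.1 ∨ (∀ b, b < 8 → conf i b ≠ 0 → F.2.getD b false = true) := by
        intro i hi
        rcases c6 i hi with hold | hnew
        · rcases hexp i hold with hiq | hclosed
          · have hiq' : i ∈ q.dropLast ∨ i ∈ [v] := List.mem_append.mp (by rw [hqeq]; exact hiq)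
            rcases hiq' with h | h
            · exact Or.inl (c4 i h)
            · rw [List.mem_singleton.mp h]
              exact Or.inr (fun b hb hcb => c7 b (List.mem_range.mpr hb) hcb)
          · exact Or.inr (fun b hb hcb => c2 b (hclosed b hb hcb))
        · exact Or.inl hnew
      obtain ⟨d1, d2, d3, d4⟩ := ih F.1 F.2 c1 hfuel1 hq1 hexp1
      rw [hstep]
      exact ⟨d1, fun i hi => d2 i (c2 i hi), d3, fun T hgood hsub i hi =>
        d4 T hgood (fun i' hi' => c8 T hgood hsub (hsub v (hq v hvq)) i' hi') i hi⟩

theorem pv_replicate_getD (i : Nat) : (List.replicate 8 false).getD i false = false := by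
  by_cases h : i < 8
  · rw [List.getD_eq_getElem _ _ (by simpa using h)]
    exact List.getElem_replicate _
  · exact List.getD_eq_default _ _ (by simpa using le_of_not_gt h)

-- ===== B's frontier loop: closure and minimality of the seen set =====
theorem pv_union_append (t s : List Nat) (hnd : t.Nodup) (hdisj : ∀ x ∈ t, x ∉ s) :
    PySem.Set.union s t = s ++ t := by
  induction t generalizing s with
  | nil => simp [PySem.Set.union, PySem.Set.update]
  | cons x t ih =>
    have hx : x ∉ s := hdisj x List.mem_cons_self
    have hadd : PySem.Set.add s x = s ++ [x] := by
      simp only [PySem.Set.add]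
      rw [if_neg (by simpa using hx)]
    have hih := ih (List.nodup_cons.mp hnd).2 (s := s ++ [x]) (fun y hy => by
      intro hmem
      rcases List.mem_append.mp hmem with h | h
      · exact hdisj y (List.mem_cons_of_mem _ hy) h
      · exact (List.nodup_cons.mp hnd).1 (List.mem_singleton.mp h ▸ hy))
    have hstep : PySem.Set.union s (x :: t) = PySem.Set.union (s ++ [x]) t := by
      simp only [PySem.Set.union, PySem.Set.update, List.foldl_cons, hadd]
    rw [hstep, hih]
    simp

theorem pv_grow_main (nbrs : Nat → List Nat) (hnb : ∀ a w, w ∈ nbrs a → w < 8) :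
    ∀ (fuel : Nat) (seen frontier : List Nat), seen.Nodup → (∀ x ∈ seen, x < 8) →
    (∀ x ∈ frontier, x ∈ seen) →
    (∀ x ∈ seen, x ∉ frontier → ∀ w ∈ nbrs x, w ∈ seen) →
    10 - seen.length ≤ fuel →
    (∀ x ∈ seen, x ∈ pvGrow nbrs fuel seen frontier) ∧
    (∀ x ∈ pvGrow nbrs fuel seen frontier, x < 8) ∧
    (∀ x ∈ pvGrow nbrs fuel seen frontier, ∀ w ∈ nbrs x, w ∈ pvGrow nbrs fuel seen frontier) ∧
    (∀ T : Nat → Prop, (∀ x w, T x → w ∈ nbrs x → T w) → (∀ x ∈ seen, T x) →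
       ∀ x ∈ pvGrow nbrs fuel seen frontier, T x) := by
  intro fuel
  induction fuel with
  | zero =>
    intro seen frontier hnd h8 hfs hcl hfuel
    exfalso
    have : seen.length ≤ 8 := by
      have hsub : seen ⊆ List.range 8 := fun x hx => List.mem_range.mpr (h8 x hx)
      simpa using (List.subperm_of_subset hnd hsub).length_le
    omega
  | succ fuel ih =>
    intro seen frontier hnd h8 hfs hcl hfuel
    have hlen8 : seen.length ≤ 8 := by
      have hsub : seen ⊆ List.range 8 := fun x hx => List.mem_range.mpr (h8 x hx)
      simpa using (List.subperm_of_subset hnd hsub).length_le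
    by_cases hfe : frontier = []
    · have hres : pvGrow nbrs (fuel + 1) seen frontier = seen := by
        simp only [pvGrow]
        rw [if_pos hfe]
      rw [hres]
      exact ⟨fun x hx => hx, h8, fun x hx w hw => hcl x hx (by rw [hfe]; simp) w hw,
        fun T _ hsub x hx => hsub x hx⟩
    · set f' := PySem.Set.diff (PySem.Set.ofList (frontier.flatMap nbrs)) seen with hf'
      have hres : pvGrow nbrs (fuel + 1) seen frontier =
          pvGrow nbrs fuel (PySem.Set.union seen f') f' := by
        simp only [pvGrow]
        rw [if_neg hfe]
      have hf'mem : ∀ x, x ∈ f' ↔ ((∃ y ∈ frontier, x ∈ nbrs y) ∧ x ∉ seen) := by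
        intro x
        rw [hf', PySem.Set.mem_diff, PySem.Set.mem_ofList, List.mem_flatMap]
      have hf'nd : f'.Nodup := PySem.Set.nodup_diff _ _ (PySem.Set.nodup_ofList _)
      have hf'disj : ∀ x ∈ f', x ∉ seen := fun x hx => ((hf'mem x).mp hx).2
      have huni : PySem.Set.union seen f' = seen ++ f' := pv_union_append f' seen hf'nd hf'disj
      have hseen' : ∀ x, x ∈ PySem.Set.union seen f' ↔ x ∈ seen ∨ x ∈ f' := by
        intro x; rw [huni, List.mem_append]
      have hnd' : (PySem.Set.union seen f').Nodup := PySem.Set.nodup_union _ _ hnd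
      have h8' : ∀ x ∈ PySem.Set.union seen f', x < 8 := by
        intro x hx
        rcases (hseen' x).mp hx with h | h
        · exact h8 x h
        · obtain ⟨⟨y, _, hy⟩, -⟩ := (hf'mem x).mp h
          exact hnb y x hy
      have hfs' : ∀ x ∈ f', x ∈ PySem.Set.union seen f' := fun x hx => (hseen' x).mpr (Or.inr hx)
      have hcl' : ∀ x ∈ PySem.Set.union seen f', x ∉ f' → ∀ w ∈ nbrs x, w ∈ PySem.Set.union seen f' := by
        intro x hx hxf w hw
        rcases (hseen' x).mp hx with hxs | hxs
        · by_cases hxfr : x ∈ frontier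
          · by_cases hws : w ∈ seen
            · exact (hseen' w).mpr (Or.inl hws)
            · exact (hseen' w).mpr (Or.inr ((hf'mem w).mpr ⟨⟨x, hxfr, hw⟩, hws⟩))
          · exact (hseen' w).mpr (Or.inl (hcl x hxs hxfr w hw))
        · exact absurd hxs hxf
      by_cases hf'e : f' = []
      · -- the new frontier is empty: the next iteration returns the seen set unchanged
        have hseen_eq : PySem.Set.union seen f' = seen := by rw [hf'e]; rfl
        have hret : pvGrow nbrs fuel (PySem.Set.union seen f') f' = seen := by
          rw [hseen_eq, hf'e]
          cases fuel with
          | zero => rfl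
          | succ fuel => simp [pvGrow]
        rw [hres, hret]
        have hclosed : ∀ x ∈ seen, ∀ w ∈ nbrs x, w ∈ seen := by
          intro x hx w hw
          by_cases hxf : x ∈ frontier
          · by_contra hws
            exact (List.eq_nil_iff_forall_not_mem.mp hf'e) w
              ((hf'mem w).mpr ⟨⟨x, hxf, hw⟩, hws⟩)
          · exact hcl x hx hxf w hw
        exact ⟨fun x hx => hx, h8, hclosed, fun T _ hsub x hx => hsub x hx⟩
      · have hfuel' : 10 - (PySem.Set.union seen f').length ≤ fuel := by
          have hlen : (PySem.Set.union seen f').length = seen.length + f'.length := by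
            rw [huni, List.length_append]
          have h1 : 1 ≤ f'.length := List.length_pos_iff.mpr hf'e
          omega
        obtain ⟨g1, g2, g3, g4⟩ := ih (PySem.Set.union seen f') f' hnd' h8' hfs' hcl' hfuel'
        rw [hres]
        refine ⟨fun x hx => g1 x ((hseen' x).mpr (Or.inl hx)), g2, g3, ?_⟩
        intro T hedge hsub x hx
        refine g4 T hedge ?_ x hx
        intro y hy
        rcases (hseen' y).mp hy with h | h
        · exact hsub y h
        · obtain ⟨⟨z, hzf, hzn⟩, -⟩ := (hf'mem y).mp h
          exact hedge z y (hsub z (hfs z hzf)) hzn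
-- ===== the two reachability computations agree =====
theorem pv_reach_mem (conf : Nat → Nat → Int) (nbrs : Nat → List Nat)
    (hnb : ∀ a w, w ∈ nbrs a → w < 8)
    (hmatch : ∀ a b : Nat, b < 8 → (b ∈ nbrs a ↔ conf a b ≠ 0))
    (s : Nat) (hs : s < 8) (v : Nat) :
    ((pvBfsA conf 73 [s] ((List.replicate 8 false).set s true)).getD v false = true) ↔
      v ∈ pvGrow nbrs 9 [s] [s] := by
  have hsl : s < (List.replicate 8 false : List Bool).length := by simpa using hs
  have hlenA : ((List.replicate 8 false).set s true).length = 8 := by simp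
  have hcF0 : (List.replicate 8 false : List Bool).count false = 8 := by simp
  have hcFA : ((List.replicate 8 false).set s true).count false + 1 = 8 := by
    rw [← hcF0]
    exact pv_cF_set_true _ s (pv_replicate_getD s) hsl
  have hsetself : ((List.replicate 8 false).set s true).getD s false = true :=
    pv_getD_set_self _ s true false hsl
  have honly : ∀ i, ((List.replicate 8 false).set s true).getD i false = true → i = s := by
    intro i hi
    by_contra hib
    rw [pv_getD_set_ne _ s i true false (fun h => hib h.symm), pv_replicate_getD i] at hi
    exact absurd hi (by simp)
  obtain ⟨b1, b2, b3, b4⟩ := pv_bfs_main conf 73 [s] ((List.replicate 8 false).set s true)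
    hlenA (by simp only [List.length_cons, List.length_nil]; omega)
    (fun y hy => by rw [List.mem_singleton.mp hy]; exact hsetself)
    (fun i hi => Or.inl (by rw [honly i hi]; exact List.mem_singleton_self _))
  obtain ⟨g1, g2, g3, g4⟩ := pv_grow_main nbrs hnb 9 [s] [s]
    (by simp) (fun x hx => by rw [List.mem_singleton.mp hx]; exact hs)
    (fun x hx => hx) (fun x hx hnx => absurd hx hnx) (by simp)
  constructor
  · intro hv
    refine b4 (fun j => j ∈ pvGrow nbrs 9 [s] [s]) ?_ ?_ v hv
    · intro a b ha hb hcb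
      exact g3 a ha b ((hmatch a b hb).mpr hcb)
    · intro j hj
      rw [honly j hj]
      exact g1 s (List.mem_singleton_self _)
  · intro hv
    refine g4 (fun j => (pvBfsA conf 73 [s] ((List.replicate 8 false).set s true)).getD j false = true)
      ?_ ?_ v hv
    · intro a w ha hw
      exact b3 a ha w (hnb a w hw) ((hmatch a w (hnb a w hw)).mp hw)
    · intro x hx
      rw [List.mem_singleton.mp hx]
      exact b2 s hsetself

-- ===== canonical map forms and list surgery helpers for the prune phase =====
theorem pv_matrix_canon (m : List (List Int)) (hsq : pvSq8 m) :
    m = (List.range 8).map (fun r => (List.range 8).map (fun c => pvGet2 m r c)) := by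
  apply List.ext_getElem
  · simp [hsq.1]
  · intro r h1 h2
    rw [List.getElem_map, List.getElem_range]
    apply List.ext_getElem
    · rw [List.length_map, List.length_range]
      exact hsq.2 _ (List.getElem_mem h1)
    · intro c hc1 hc2
      rw [List.getElem_map, List.getElem_range]
      rw [pvGet2, List.getD_eq_getElem m [] h1, List.getD_eq_getElem _ 0 hc1]

theorem pv_list_canon {α : Type} (L : List α) (d : α) (h : L.length = 8) :
    L = (List.range 8).map (fun v => L.getD v d) := by
  apply List.ext_getElem
  · simp [h]
  · intro i h1 h2
    rw [List.getElem_map, List.getElem_range, List.getD_eq_getElem L d h1]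

theorem pv_map_range_set {α : Type} (n k : Nat) (f : Nat → α) (x : α) (hk : k < n) :
    ((List.range n).map f).set k x = (List.range n).map (fun v => if v = k then x else f v) := by
  apply List.ext_getElem
  · simp
  · intro i h1 h2
    rw [List.length_set, List.length_map, List.length_range] at h1
    simp only [List.getElem_set, List.getElem_map, List.getElem_range]
    by_cases hik : k = i
    · rw [if_pos hik, if_pos hik.symm]
    · rw [if_neg hik, if_neg (Ne.symm hik)]

theorem pv_fold_set_take {α : Type} (d : α) (h : α → α) :
    ∀ (n : Nat) (l : List α), n ≤ l.length →
    (List.range n).foldl (fun m i => m.set i (h (m.getD i d))) l =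
      (l.take n).map h ++ l.drop n := by
  intro n
  induction n with
  | zero => intro l _; simp
  | succ n ih =>
    intro l hn
    have hlt : n < l.length := by omega
    rw [List.range_succ, List.foldl_append, ih l (by omega)]
    simp only [List.foldl_cons, List.foldl_nil]
    have hslen : ((l.take n).map h).length = n := by
      rw [List.length_map, List.length_take]; omega
    have hdrop : l.drop n = l[n] :: l.drop (n + 1) := List.drop_eq_getElem_cons hlt
    rw [hdrop]
    have hgetD : ((l.take n).map h ++ l[n] :: l.drop (n + 1)).getD n d = l[n] := by
      rw [List.getD, List.getElem?_append_right (le_of_eq hslen), hslen, Nat.sub_self]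
      simp [List.getElem?_eq_getElem hlt]
    rw [hgetD, List.set_append, if_neg (by rw [hslen]; exact lt_irrefl n), hslen, Nat.sub_self,
        List.set_cons_zero]
    have htake : (List.map h l).take (n + 1) = (List.map h l).take n ++ [h l[n]] := by
      rw [List.take_succ, List.getElem?_map, List.getElem?_eq_getElem hlt]
      rfl
    rw [List.map_take, List.map_take, htake, List.append_assoc, List.singleton_append]

theorem pv_fold_set_map {α : Type} (d : α) (h : α → α) (l : List α) :
    (List.range l.length).foldl (fun m i => m.set i (h (m.getD i d))) l = l.map h := by
  rw [pv_fold_set_take d h l.length l le_rfl]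
  simp

theorem pv_range8_filter_split (k : Nat) (hk : k < 8) (p : Nat → Bool) (hpk : p k = false) :
    ((List.range 8).filter (fun r => decide (r < k + 1) || p r) =
      List.range k ++ k :: ((List.range (7 - k)).map (fun x => (k + 1) + x)).filter p) ∧
    ((List.range 8).filter (fun r => decide (r < k) || p r) =
      List.range k ++ ((List.range (7 - k)).map (fun x => (k + 1) + x)).filter p) := by
  have h8 : 8 = (k + 1) + (7 - k) := by omega
  have hsplit : List.range 8 = List.range (k + 1) ++ (List.range (7 - k)).map (fun x => (k + 1) + x) := by
    rw [h8, List.range_add]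
  constructor
  · rw [hsplit, List.filter_append]
    have h1 : (List.range (k + 1)).filter (fun r => decide (r < k + 1) || p r) = List.range (k + 1) :=
      List.filter_eq_self.mpr (fun a ha => by
        have := List.mem_range.mp ha
        simp [this])
    have h2 : ((List.range (7 - k)).map (fun x => (k + 1) + x)).filter
          (fun r => decide (r < k + 1) || p r) =
        ((List.range (7 - k)).map (fun x => (k + 1) + x)).filter p :=
      List.filter_congr (fun x hx => by
        obtain ⟨y, hy, rfl⟩ := List.mem_map.mp hx
        rw [decide_eq_false (by omega : ¬ (k + 1 + y < k + 1)), Bool.false_or])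
    rw [h1, h2, List.range_succ]
    simp [List.append_assoc]
  · rw [hsplit, List.filter_append]
    have h1 : (List.range (k + 1)).filter (fun r => decide (r < k) || p r) = List.range k := by
      rw [List.range_succ, List.filter_append]
      have ha : (List.range k).filter (fun r => decide (r < k) || p r) = List.range k :=
        List.filter_eq_self.mpr (fun a ha => by
          have := List.mem_range.mp ha
          simp [this])
      have hb : ([k] : List Nat).filter (fun r => decide (r < k) || p r) = [] := by
        simp [hpk]
      rw [ha, hb, List.append_nil]
    have h2 : ((List.range (7 - k)).map (fun x => (k + 1) + x)).filter
          (fun r => decide (r < k) || p r) =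
        ((List.range (7 - k)).map (fun x => (k + 1) + x)).filter p :=
      List.filter_congr (fun x hx => by
        obtain ⟨y, hy, rfl⟩ := List.mem_map.mp hx
        rw [decide_eq_false (by omega : ¬ (k + 1 + y < k)), Bool.false_or])
    rw [h1, h2]

-- ===== A's reverse deletion loop, characterized =====
theorem pv_prune_step_id (vf vb : List Bool) (kd : Bool) (m : List (List Int))
    (labels : List (Option String)) (v : Nat)
    (hcond : ¬(vf.getD v false = false ∨ vb.getD v false = false)) :
    pvPruneStepA vf vb kd (m, labels) v = (m, labels) := by
  simp only [pvPruneStepA]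
  rw [if_neg hcond]

theorem pv_prune_step_false (vf vb : List Bool) (m : List (List Int))
    (labels : List (Option String)) (v : Nat)
    (hcond : vf.getD v false = false ∨ vb.getD v false = false) :
    pvPruneStepA vf vb false (m, labels) v =
      ((List.range (m.eraseIdx v).length).foldl
          (fun m other => m.set other ((m.getD other []).eraseIdx v)) (m.eraseIdx v),
       labels.set v none) := by
  simp only [pvPruneStepA]
  rw [if_pos hcond]
  simp

theorem pv_prune_step_true (vf vb : List Bool) (m : List (List Int))
    (labels : List (Option String)) (v : Nat)
    (hcond : vf.getD v false = false ∨ vb.getD v false = false) :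
    pvPruneStepA vf vb true (m, labels) v =
      ((List.range (m.set v (List.replicate 8 0)).length).foldl
          (fun m other => pvSet2 m other v 0) (m.set v (List.replicate 8 0)),
       labels.set v none) := by
  simp only [pvPruneStepA]
  rw [if_pos hcond]
  simp

theorem pv_downFrom_succ (k : Nat) :
    (List.range (k + 1)).reverse = k :: (List.range k).reverse := by
  rw [List.range_succ]
  simp

theorem pv_prune_nokeep (vf vb : List Bool) (f : Nat → Nat → Int) (L : Nat → Option String) :
    ∀ k : Nat, k ≤ 8 →
    ((List.range k).reverse).foldl (pvPruneStepA vf vb false)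
      ( ((List.range 8).filter (fun r => decide (r < k) || (vf.getD r false && vb.getD r false))).map
          (fun r => ((List.range 8).filter
              (fun c => decide (c < k) || (vf.getD c false && vb.getD c false))).map
            (fun c => f r c)),
        (List.range 8).map
          (fun v => if decide (v < k) || (vf.getD v false && vb.getD v false) then L v else none) ) =
    ( ((List.range 8).filter (fun r => vf.getD r false && vb.getD r false)).map
        (fun r => ((List.range 8).filter (fun c => vf.getD c false && vb.getD c false)).map
          (fun c => f r c)),
      (List.range 8).map (fun v => if vf.getD v false && vb.getD v false then L v else none) ) := by
  intro k
  induction k with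
  | zero =>
    intro _
    simp only [List.range_zero, List.reverse_nil, List.foldl_nil]
    have hpred : ∀ r : Nat, (decide (r < 0) || (vf.getD r false && vb.getD r false)) =
        (vf.getD r false && vb.getD r false) := by
      intro r
      rw [decide_eq_false (by omega), Bool.false_or]
    simp only [hpred]
  | succ k ih =>
    intro hk1
    have hk : k < 8 := by omega
    rw [pv_downFrom_succ, List.foldl_cons]
    by_cases hp : (vf.getD k false && vb.getD k false) = true
    · -- node k is kept: the step is the identity and the window shrinks trivially
      have hcond : ¬(vf.getD k false = false ∨ vb.getD k false = false) := by
        rw [Bool.and_eq_true] at hp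
        rintro (h | h)
        · rw [hp.1] at h; exact absurd h (by simp)
        · rw [hp.2] at h; exact absurd h (by simp)
      rw [pv_prune_step_id vf vb false _ _ k hcond]
      have hpred : ∀ r : Nat, (decide (r < k + 1) || (vf.getD r false && vb.getD r false)) =
          (decide (r < k) || (vf.getD r false && vb.getD r false)) := by
        intro r
        by_cases hrk : r = k
        · subst hrk
          rw [hp, Bool.or_true, Bool.or_true]
        · have : decide (r < k + 1) = decide (r < k) := decide_eq_decide.mpr (by omega)
          rw [this]
      simp only [hpred]
      exact ih (by omega)
    · -- node k is dropped: delete row k and column k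
      have hpk : (vf.getD k false && vb.getD k false) = false := by
        cases h : (vf.getD k false && vb.getD k false)
        · rfl
        · exact absurd h hp
      have hcond : vf.getD k false = false ∨ vb.getD k false = false := by
        rcases Bool.and_eq_false_iff.mp hpk with h | h
        · exact Or.inl (by cases hv : vf.getD k false <;> simp_all)
        · exact Or.inr (by cases hv : vb.getD k false <;> simp_all)
      obtain ⟨hs1, hs2⟩ :=
        pv_range8_filter_split k hk (fun v => vf.getD v false && vb.getD v false) hpk
      set T := ((List.range (7 - k)).map (fun x => (k + 1) + x)).filter
        (fun v => vf.getD v false && vb.getD v false) with hT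
      rw [pv_prune_step_false vf vb _ _ k hcond]
      -- the matrix after deleting row k and every row's entry k
      have hrow : ∀ r : Nat,
          ((List.range 8).filter
              (fun c => decide (c < k + 1) || (vf.getD c false && vb.getD c false))).map
            (fun c => f r c) =
          (List.range k).map (fun c => f r c) ++ f r k :: T.map (fun c => f r c) := by
        intro r
        rw [hs1]
        simp
      have hrowlen : ((List.range k).map (fun c : Nat => f 0 c)).length = k := by simp
      have hmat :
          (((List.range 8).filter
              (fun r => decide (r < k + 1) || (vf.getD r false && vb.getD r false))).map
            (fun r => ((List.range 8).filter
                (fun c => decide (c < k + 1) || (vf.getD c false && vb.getD c false))).map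
              (fun c => f r c))).eraseIdx k =
          (List.range k ++ T).map (fun r => ((List.range 8).filter
              (fun c => decide (c < k + 1) || (vf.getD c false && vb.getD c false))).map
            (fun c => f r c)) := by
        rw [hs1, List.map_append, List.map_cons,
            List.eraseIdx_append_of_length_le (by simp),
            List.map_append]
        simp
      rw [hmat]
      rw [pv_fold_set_map ([] : List Int) (fun row => row.eraseIdx k), List.map_map]
      have hrows : ∀ r : Nat,
          (((List.range 8).filter
              (fun c => decide (c < k + 1) || (vf.getD c false && vb.getD c false))).map
            (fun c => f r c)).eraseIdx k =
          ((List.range 8).filter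
              (fun c => decide (c < k) || (vf.getD c false && vb.getD c false))).map
            (fun c => f r c) := by
        intro r
        rw [hs1, hs2, List.map_append, List.map_cons,
            List.eraseIdx_append_of_length_le (by simp), List.map_append]
        simp
      have hfun : ((fun row : List Int => row.eraseIdx k) ∘ (fun r => ((List.range 8).filter
            (fun c => decide (c < k + 1) || (vf.getD c false && vb.getD c false))).map
              (fun c => f r c))) =
          (fun r => ((List.range 8).filter
            (fun c => decide (c < k) || (vf.getD c false && vb.getD c false))).map
              (fun c => f r c)) := funext (fun r => hrows r)
      rw [hfun, ← hs2]
      -- labels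
      have hlab : ((List.range 8).map (fun v =>
            if decide (v < k + 1) || (vf.getD v false && vb.getD v false) then L v else none)).set
              k none =
          (List.range 8).map (fun v =>
            if decide (v < k) || (vf.getD v false && vb.getD v false) then L v else none) := by
        rw [pv_map_range_set 8 k _ none hk]
        apply List.map_congr_left
        intro v hv
        by_cases hvk : v = k
        · subst hvk
          rw [if_pos rfl, decide_eq_false (by omega), Bool.false_or, hpk]
          simp
        · rw [if_neg hvk]
          have : decide (v < k + 1) = decide (v < k) := decide_eq_decide.mpr (by omega)
          rw [this]
      rw [hlab]
      exact ih (by omega)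

theorem pv_prune_keep (vf vb : List Bool) (f : Nat → Nat → Int) (L : Nat → Option String) :
    ∀ k : Nat, k ≤ 8 →
    ((List.range k).reverse).foldl (pvPruneStepA vf vb true)
      ( (List.range 8).map (fun r => (List.range 8).map (fun c =>
          if (decide (r < k) || (vf.getD r false && vb.getD r false)) &&
             (decide (c < k) || (vf.getD c false && vb.getD c false)) then f r c else 0)),
        (List.range 8).map
          (fun v => if decide (v < k) || (vf.getD v false && vb.getD v false) then L v else none) ) =
    ( (List.range 8).map (fun r => (List.range 8).map (fun c =>
        if (vf.getD r false && vb.getD r false) && (vf.getD c false && vb.getD c false)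
        then f r c else 0)),
      (List.range 8).map (fun v => if vf.getD v false && vb.getD v false then L v else none) ) := by
  intro k
  induction k with
  | zero =>
    intro _
    simp only [List.range_zero, List.reverse_nil, List.foldl_nil]
    have hpred : ∀ r : Nat, (decide (r < 0) || (vf.getD r false && vb.getD r false)) =
        (vf.getD r false && vb.getD r false) := by
      intro r
      rw [decide_eq_false (by omega), Bool.false_or]
    simp only [hpred]
  | succ k ih =>
    intro hk1
    have hk : k < 8 := by omega
    rw [pv_downFrom_succ, List.foldl_cons]
    by_cases hp : (vf.getD k false && vb.getD k false) = true
    · have hcond : ¬(vf.getD k false = false ∨ vb.getD k false = false) := by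
        rw [Bool.and_eq_true] at hp
        rintro (h | h)
        · rw [hp.1] at h; exact absurd h (by simp)
        · rw [hp.2] at h; exact absurd h (by simp)
      rw [pv_prune_step_id vf vb true _ _ k hcond]
      have hpred : ∀ r : Nat, (decide (r < k + 1) || (vf.getD r false && vb.getD r false)) =
          (decide (r < k) || (vf.getD r false && vb.getD r false)) := by
        intro r
        by_cases hrk : r = k
        · subst hrk
          rw [hp, Bool.or_true, Bool.or_true]
        · have : decide (r < k + 1) = decide (r < k) := decide_eq_decide.mpr (by omega)
          rw [this]
      simp only [hpred]
      exact ih (by omega)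
    · have hpk : (vf.getD k false && vb.getD k false) = false := by
        cases h : (vf.getD k false && vb.getD k false)
        · rfl
        · exact absurd h hp
      have hcond : vf.getD k false = false ∨ vb.getD k false = false := by
        rcases Bool.and_eq_false_iff.mp hpk with h | h
        · exact Or.inl (by cases hv : vf.getD k false <;> simp_all)
        · exact Or.inr (by cases hv : vb.getD k false <;> simp_all)
      rw [pv_prune_step_true vf vb _ _ k hcond]
      -- set row k to zeros
      have hrepl : (List.replicate 8 (0 : Int)) = (List.range 8).map (fun c =>
          if (decide (k < k) || (vf.getD k false && vb.getD k false)) &&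
             (decide (c < k + 1) || (vf.getD c false && vb.getD c false)) then f k c else 0) := by
        have h1 : (decide (k < k) || (vf.getD k false && vb.getD k false)) = false := by
          rw [decide_eq_false (by omega : ¬ k < k), Bool.false_or, hpk]
        rw [h1]
        simp
      have hsetrow : ((List.range 8).map (fun r => (List.range 8).map (fun c =>
            if (decide (r < k + 1) || (vf.getD r false && vb.getD r false)) &&
               (decide (c < k + 1) || (vf.getD c false && vb.getD c false)) then f r c else 0))).set
              k (List.replicate 8 0) =
          (List.range 8).map (fun r => (List.range 8).map (fun c =>
            if (decide (r < k) || (vf.getD r false && vb.getD r false)) &&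
               (decide (c < k + 1) || (vf.getD c false && vb.getD c false)) then f r c else 0)) := by
        rw [pv_map_range_set 8 k _ _ hk]
        apply List.map_congr_left
        intro r hr
        by_cases hrk : r = k
        · subst hrk
          rw [if_pos rfl, hrepl]
        · rw [if_neg hrk]
          have : decide (r < k + 1) = decide (r < k) := decide_eq_decide.mpr (by omega)
          rw [this]
      rw [hsetrow]
      -- zero column k in every row
      have hmaplen : ((List.range 8).map (fun r => (List.range 8).map (fun c =>
          if (decide (r < k) || (vf.getD r false && vb.getD r false)) &&
             (decide (c < k + 1) || (vf.getD c false && vb.getD c false)) then f r c else 0))).length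
          = 8 := by simp
      have hcolfold : (List.range ((List.range 8).map (fun r => (List.range 8).map (fun c =>
            if (decide (r < k) || (vf.getD r false && vb.getD r false)) &&
               (decide (c < k + 1) || (vf.getD c false && vb.getD c false)) then f r c else 0))).length).foldl
            (fun m other => pvSet2 m other k 0)
            ((List.range 8).map (fun r => (List.range 8).map (fun c =>
              if (decide (r < k) || (vf.getD r false && vb.getD r false)) &&
                 (decide (c < k + 1) || (vf.getD c false && vb.getD c false)) then f r c else 0))) =
          ((List.range 8).map (fun r => (List.range 8).map (fun c =>
            if (decide (r < k) || (vf.getD r false && vb.getD r false)) &&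
               (decide (c < k + 1) || (vf.getD c false && vb.getD c false)) then f r c else 0))).map
            (fun row => row.set k 0) := by
        simp only [pvSet2]
        exact pv_fold_set_map ([] : List Int) (fun row => row.set k 0) _
      rw [hcolfold, List.map_map]
      have hfun : ((fun row : List Int => row.set k 0) ∘ (fun r => (List.range 8).map (fun c =>
            if (decide (r < k) || (vf.getD r false && vb.getD r false)) &&
               (decide (c < k + 1) || (vf.getD c false && vb.getD c false)) then f r c else 0))) =
          (fun r => (List.range 8).map (fun c =>
            if (decide (r < k) || (vf.getD r false && vb.getD r false)) &&
               (decide (c < k) || (vf.getD c false && vb.getD c false)) then f r c else 0)) := by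
        funext r
        show ((List.range 8).map (fun c =>
            if (decide (r < k) || (vf.getD r false && vb.getD r false)) &&
               (decide (c < k + 1) || (vf.getD c false && vb.getD c false)) then f r c else 0)).set
              k 0 = _
        rw [pv_map_range_set 8 k _ _ hk]
        apply List.map_congr_left
        intro c hc
        by_cases hck : c = k
        · have h1 : (decide (c < k) || (vf.getD c false && vb.getD c false)) = false := by
            rw [hck, decide_eq_false (by omega : ¬ k < k), Bool.false_or, hpk]
          rw [if_pos hck, h1, Bool.and_false]
          simp
        · rw [if_neg hck]
          have : decide (c < k + 1) = decide (c < k) := decide_eq_decide.mpr (by omega)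
          rw [this]
      rw [hfun]
      -- labels
      have hlab : ((List.range 8).map (fun v =>
            if decide (v < k + 1) || (vf.getD v false && vb.getD v false) then L v else none)).set
              k none =
          (List.range 8).map (fun v =>
            if decide (v < k) || (vf.getD v false && vb.getD v false) then L v else none) := by
        rw [pv_map_range_set 8 k _ none hk]
        apply List.map_congr_left
        intro v hv
        by_cases hvk : v = k
        · subst hvk
          rw [if_pos rfl, decide_eq_false (by omega), Bool.false_or, hpk]
          simp
        · rw [if_neg hvk]
          have : decide (v < k + 1) = decide (v < k) := decide_eq_decide.mpr (by omega)
          rw [this]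
      rw [hlab]
      exact ih (by omega)

-- ===== VERDICT (by name: the statement is the Claim_ definition above) =====
set_option maxHeartbeats 1600000 in
theorem get_matrix_and_ops_spec : Claim_equal_get_matrix_and_ops := by
  intro g prune keep_dims _ hpre
  obtain ⟨hg7, hprune⟩ := hpre
  unfold Spec_get_matrix_and_ops get_matrix_and_ops get_matrix_and_ops_alt
  obtain ⟨⟨hsq, hut, h01, hEb, hiff⟩, hlablen, hlab⟩ := pv_loop g hg7
  set st := (List.zipIdx g).foldl pvOpStepA (pvInitMatrixA, pvInitLabelsA) with hst
  set E := (List.zipIdx g).foldl pvEStep pvEdges0 with hE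
  have hent : ∀ r c : Nat, r < 8 → c < 8 →
      pvGet2 st.1 r c = (if (r, c) ∈ E then (1 : Int) else 0) := by
    intro r c hr hc
    by_cases hm : (r, c) ∈ E
    · rw [if_pos hm, (hiff r c hr hc).mp hm]
    · rw [if_neg hm]
      rcases h01 r c hr hc with h | h
      · exact h
      · exact absurd ((hiff r c hr hc).mpr h) hm
  cases prune with
  | false =>
    simp only [Bool.false_eq_true, if_false, if_true]
    refine congrArg₂ Prod.mk ?_ ?_
    · rw [pv_matrix_canon st.1 hsq]
      apply List.map_congr_left
      intro r hr
      apply List.map_congr_left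
      intro c hc
      exact hent r c (List.mem_range.mp hr) (List.mem_range.mp hc)
    · rw [pv_list_canon st.2 none hlablen]
      apply List.map_congr_left
      intro v hv
      exact hlab v (List.mem_range.mp hv)
  | true =>
    simp only [if_true, Bool.not_true, Bool.true_eq_false, if_false]
    set nbf : Nat → List Nat := fun v => (E.filter (fun e => e.1 = v)).map Prod.snd with hnbf
    set nbb : Nat → List Nat := fun v => (E.filter (fun e => e.2 = v)).map Prod.fst with hnbb
    set conf : Nat → Nat → Int := fun src dst => pvGet2 st.1 src dst with hconf
    set conb : Nat → Nat → Int := fun src dst => pvGet2 st.1 dst src with hconb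
    have hnbf8 : ∀ a w, w ∈ nbf a → w < 8 := by
      intro a w hw
      obtain ⟨e, he, hw2⟩ := List.mem_map.mp hw
      exact hw2 ▸ (hEb e (List.mem_filter.mp he).1).2
    have hnbb8 : ∀ a w, w ∈ nbb a → w < 8 := by
      intro a w hw
      obtain ⟨e, he, hw2⟩ := List.mem_map.mp hw
      exact hw2 ▸ (hEb e (List.mem_filter.mp he).1).1
    have hmemf : ∀ a b : Nat, b ∈ nbf a ↔ (a, b) ∈ E := by
      intro a b
      have := pv_mem_succsB E a b
      rw [PySem.Set.mem_ofList] at this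
      exact this
    have hmemb : ∀ a b : Nat, b ∈ nbb a ↔ (b, a) ∈ E := by
      intro a b
      have := pv_mem_predsB E a b
      rw [PySem.Set.mem_ofList] at this
      exact this
    have hedge : ∀ a b : Nat, b < 8 → ((a, b) ∈ E ↔ pvGet2 st.1 a b ≠ 0) := by
      intro a b hb
      by_cases ha : a < 8
      · rw [hiff a b ha hb]
        constructor
        · intro h; rw [h]; norm_num
        · intro h
          rcases h01 a b ha hb with h0 | h0
          · exact absurd h0 h
          · exact h0
      · constructor
        · intro h; exact absurd ((hEb _ h).1) ha
        · intro h
          exact absurd (pvGet2_oob st.1 hsq a b (Or.inl (by omega))) h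
    have hedge' : ∀ a b : Nat, b < 8 → ((b, a) ∈ E ↔ pvGet2 st.1 b a ≠ 0) := by
      intro a b hb
      by_cases ha : a < 8
      · rw [hiff b a hb ha]
        constructor
        · intro h; rw [h]; norm_num
        · intro h
          rcases h01 b a hb ha with h0 | h0
          · exact absurd h0 h
          · exact h0
      · constructor
        · intro h; exact absurd ((hEb _ h).2) ha
        · intro h
          exact absurd (pvGet2_oob st.1 hsq b a (Or.inr (by omega))) h
    have hfw : ∀ v, (pvBfsA conf 73 [0] ((List.replicate 8 false).set 0 true)).getD v false = true ↔
        v ∈ pvGrow nbf 9 [0] [0] :=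
      pv_reach_mem conf nbf hnbf8
        (fun a b hb => (hmemf a b).trans (hedge a b hb)) 0 (by norm_num)
    have hbw : ∀ v, (pvBfsA conb 73 [7] ((List.replicate 8 false).set 7 true)).getD v false = true ↔
        v ∈ pvGrow nbb 9 [7] [7] :=
      pv_reach_mem conb nbb hnbb8
        (fun a b hb => (hmemb a b).trans (hedge' a b hb)) 7 (by norm_num)
    set vf := pvBfsA conf 73 [0] ((List.replicate 8 false).set 0 true) with hvf
    set vb := pvBfsA conb 73 [7] ((List.replicate 8 false).set 7 true) with hvb
    set fw := pvGrow nbf 9 [0] [0] with hfwdef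
    set bw := pvGrow nbb 9 [7] [7] with hbwdef
    have hpt : ∀ v : Nat, (decide (v ∈ fw ∧ v ∈ bw)) = (vf.getD v false && vb.getD v false) := by
      intro v
      by_cases h1 : v ∈ fw
      · by_cases h2 : v ∈ bw
        · rw [decide_eq_true (And.intro h1 h2), ((hfw v).mpr h1), ((hbw v).mpr h2)]
          rfl
        · rw [decide_eq_false (fun h => h2 h.2)]
          have hzb : vb.getD v false = false := by
            cases h : vb.getD v false
            · rfl
            · exact absurd ((hbw v).mp h) h2
          rw [hzb, Bool.and_false]
      · rw [decide_eq_false (fun h => h1 h.1)]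
        have hzf : vf.getD v false = false := by
          cases h : vf.getD v false
          · rfl
          · exact absurd ((hfw v).mp h) h1
        rw [hzf, Bool.false_and]
    have hkept : (List.range 8).filter (fun v => decide (v ∈ fw ∧ v ∈ bw)) =
        (List.range 8).filter (fun v => vf.getD v false && vb.getD v false) :=
      List.filter_congr (fun v _ => hpt v)
    have hkmem : ∀ v, v ∈ (List.range 8).filter (fun v => vf.getD v false && vb.getD v false) ↔
        (v < 8 ∧ (vf.getD v false && vb.getD v false) = true) := by
      intro v
      rw [List.mem_filter, List.mem_range]
    cases keep_dims with
    | true =>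
      simp only [if_true]
      have hstart := pv_prune_keep vf vb (fun r c => pvGet2 st.1 r c)
        (fun v => st.2.getD v none) 8 le_rfl
      have hm8 : (List.range 8).map (fun r => (List.range 8).map (fun c =>
          if (decide (r < 8) || (vf.getD r false && vb.getD r false)) &&
             (decide (c < 8) || (vf.getD c false && vb.getD c false))
          then pvGet2 st.1 r c else 0)) = st.1 := by
        conv_rhs => rw [pv_matrix_canon st.1 hsq]
        apply List.map_congr_left
        intro r hr
        apply List.map_congr_left
        intro c hc
        rw [decide_eq_true (List.mem_range.mp hr), decide_eq_true (List.mem_range.mp hc)]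
        simp
      have hl8 : (List.range 8).map (fun v =>
          if decide (v < 8) || (vf.getD v false && vb.getD v false)
          then st.2.getD v none else none) = st.2 := by
        conv_rhs => rw [pv_list_canon st.2 none hlablen]
        apply List.map_congr_left
        intro v hv
        rw [decide_eq_true (List.mem_range.mp hv)]
        simp
      rw [hm8, hl8] at hstart
      rw [hstart]
      refine congrArg₂ Prod.mk ?_ ?_
      · apply List.map_congr_left
        intro r hr
        apply List.map_congr_left
        intro c hc
        rw [hkept]
        by_cases hrK : r ∈ (List.range 8).filter (fun v => vf.getD v false && vb.getD v false)
        · by_cases hcK : c ∈ (List.range 8).filter (fun v => vf.getD v false && vb.getD v false)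
          · rw [if_pos (by rw [((hkmem r).mp hrK).2, ((hkmem c).mp hcK).2]; rfl)]
            show pvGet2 st.1 r c = _
            rw [hent r c (List.mem_range.mp hr) (List.mem_range.mp hc)]
            by_cases hm : (r, c) ∈ E
            · rw [if_pos hm, if_pos ⟨hrK, hcK, hm⟩]
            · rw [if_neg hm, if_neg (fun h => hm h.2.2)]
          · rw [if_neg, if_neg (fun h => hcK h.2.1)]
            intro h
            rw [Bool.and_eq_true] at h
            exact hcK ((hkmem c).mpr ⟨List.mem_range.mp hc, h.2⟩)
        · rw [if_neg, if_neg (fun h => hrK h.1)]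
          intro h
          rw [Bool.and_eq_true] at h
          exact hrK ((hkmem r).mpr ⟨List.mem_range.mp hr, h.1⟩)
      · apply List.map_congr_left
        intro v hv
        rw [hkept]
        by_cases hvK : v ∈ (List.range 8).filter (fun v => vf.getD v false && vb.getD v false)
        · rw [if_pos ((hkmem v).mp hvK).2, if_pos hvK]
          exact hlab v (List.mem_range.mp hv)
        · rw [if_neg, if_neg hvK]
          intro h
          exact hvK ((hkmem v).mpr ⟨List.mem_range.mp hv, h⟩)
    | false =>
      simp only [Bool.false_eq_true, if_false]
      have hstart := pv_prune_nokeep vf vb (fun r c => pvGet2 st.1 r c)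
        (fun v => st.2.getD v none) 8 le_rfl
      have hfilt8 : ∀ q : Nat → Bool,
          (List.range 8).filter (fun r => decide (r < 8) || q r) = List.range 8 := by
        intro q
        apply List.filter_eq_self.mpr
        intro a ha
        rw [decide_eq_true (List.mem_range.mp ha), Bool.true_or]
      have hm8 : ((List.range 8).filter
            (fun r => decide (r < 8) || (vf.getD r false && vb.getD r false))).map
          (fun r => ((List.range 8).filter
              (fun c => decide (c < 8) || (vf.getD c false && vb.getD c false))).map
            (fun c => pvGet2 st.1 r c)) = st.1 := by
        rw [hfilt8 (fun v => vf.getD v false && vb.getD v false)]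
        exact (pv_matrix_canon st.1 hsq).symm
      have hl8 : (List.range 8).map (fun v =>
          if decide (v < 8) || (vf.getD v false && vb.getD v false)
          then st.2.getD v none else none) = st.2 := by
        conv_rhs => rw [pv_list_canon st.2 none hlablen]
        apply List.map_congr_left
        intro v hv
        rw [decide_eq_true (List.mem_range.mp hv)]
        simp
      rw [hm8, hl8] at hstart
      rw [hstart]
      refine congrArg₂ Prod.mk ?_ ?_
      · rw [hkept]
        apply List.map_congr_left
        intro r hr
        apply List.map_congr_left
        intro c hc
        have hr8 := List.mem_range.mp (List.mem_filter.mp hr).1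
        have hc8 := List.mem_range.mp (List.mem_filter.mp hc).1
        exact hent r c hr8 hc8
      · rw [hkept, List.filter_map]
        have hBmerge : (((List.range 8).filter
              (fun v => vf.getD v false && vb.getD v false)).filter
              (fun v => (pvLab g v).isSome)).map (fun v => pvLab g v) =
            ((List.range 8).filter (fun v =>
              (pvLab g v).isSome && (vf.getD v false && vb.getD v false))).map
              (fun v => pvLab g v) := by
          rw [List.filter_filter]
        rw [hBmerge]
        have hpredeq : ∀ v ∈ List.range 8,
            ((fun l : Option String => l.isSome) ∘
              (fun v => if vf.getD v false && vb.getD v false then st.2.getD v none else none)) v =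
            ((pvLab g v).isSome && (vf.getD v false && vb.getD v false)) := by
          intro v hv
          show (if vf.getD v false && vb.getD v false then st.2.getD v none else none).isSome =
            ((pvLab g v).isSome && (vf.getD v false && vb.getD v false))
          by_cases hpv : (vf.getD v false && vb.getD v false) = true
          · rw [if_pos hpv, hpv, Bool.and_true, hlab v (List.mem_range.mp hv)]
          · have hz : (vf.getD v false && vb.getD v false) = false := by
              cases h : (vf.getD v false && vb.getD v false)
              · rfl
              · exact absurd h hpv
            rw [if_neg hpv, hz, Bool.and_false]
            rfl
        rw [List.filter_congr hpredeq]
        apply List.map_congr_left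
        intro v hv
        have hvp := (List.mem_filter.mp hv).2
        have hv8 := List.mem_range.mp (List.mem_filter.mp hv).1
        rw [Bool.and_eq_true] at hvp
        rw [if_pos hvp.2]
        exact hlab v hv8
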